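-- pv_equiv track=rewrite | github.com/thomasmichaelkane/aoc24 | lib.py | find_regions_as_arrays
-- ===== SOURCE A (Python) =====
-- def find_regions_as_arrays(matrix):
--     rows, cols = len(matrix), len(matrix[0])
--     visited = [[False] * cols for _ in range(rows)]
--     region_arrays = []
--
--     def is_valid(r, c):
--         return 0 <= r < rows and 0 <= c < cols and matrix[r][c] and not visited[r][c]
--
--     def dfs(r, c, region_array):
--         # Perform DFS to mark all connected cells
--         stack = [(r, c)]
--         while stack:
--             x, y = stack.pop()
--             if not visited[x][y]:
--                 visited[x][y] = True
--                 region_array[x][y] = True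
--                 # Check only 4 directions: N, S, E, W
--                 for dr, dc in [(-1, 0), (1, 0), (0, -1), (0, 1)]:
--                     if is_valid(x + dr, y + dc):
--                         stack.append((x + dr, y + dc))
--
--     for r in range(rows):
--         for c in range(cols):
--             if matrix[r][c] and not visited[r][c]:
--                 # Start a new region as an empty 2D array
--                 region_array = [[False] * cols for _ in range(rows)]
--                 dfs(r, c, region_array)
--                 region_arrays.append(region_array)
--
--     return region_arrays
-- ===== SOURCE B (Python) =====
-- def find_regions_as_arrays(matrix):
--     rows, cols = len(matrix), len(matrix[0])
--     n = rows * cols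
--     parent = list(range(n))
--
--     def find(x):
--         while parent[x] != x:
--             x = parent[x]
--         return x
--
--     for i in range(n):
--         r, c = divmod(i, cols)
--         if matrix[r][c]:
--             if r > 0 and matrix[r - 1][c]:
--                 a, b = find(i), find(i - cols)
--                 if a != b:
--                     parent[max(a, b)] = min(a, b)
--             if c > 0 and matrix[r][c - 1]:
--                 a, b = find(i), find(i - 1)
--                 if a != b:
--                     parent[max(a, b)] = min(a, b)
--
--     region_arrays = []
--     slot = {}
--     for i in range(n):
--         r, c = divmod(i, cols)
--         if matrix[r][c]:
--             root = find(i)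
--             if root not in slot:
--                 slot[root] = len(region_arrays)
--                 region_arrays.append([[False] * cols for _ in range(rows)])
--             region_arrays[slot[root]][r][c] = True
--     return region_arrays
-- ===== Notes on version B (the rewrite author's own statement) =====
-- stated objective: alternative
-- what changed: Replaces A's DFS flood fill (visited matrix + explicit stack, one flood per region) by a union-find (disjoint-set) over flat cell indices: one row-major pass unions each truthy cell with its up and left neighbours, always linking the larger root under the smaller so each root is its component's first row-major cell; a second pass groups cells by their root via a root->slot dict, allocating each region array lazily at the root's first occurrence, which reproduces A's region order.
import Mathlib
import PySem

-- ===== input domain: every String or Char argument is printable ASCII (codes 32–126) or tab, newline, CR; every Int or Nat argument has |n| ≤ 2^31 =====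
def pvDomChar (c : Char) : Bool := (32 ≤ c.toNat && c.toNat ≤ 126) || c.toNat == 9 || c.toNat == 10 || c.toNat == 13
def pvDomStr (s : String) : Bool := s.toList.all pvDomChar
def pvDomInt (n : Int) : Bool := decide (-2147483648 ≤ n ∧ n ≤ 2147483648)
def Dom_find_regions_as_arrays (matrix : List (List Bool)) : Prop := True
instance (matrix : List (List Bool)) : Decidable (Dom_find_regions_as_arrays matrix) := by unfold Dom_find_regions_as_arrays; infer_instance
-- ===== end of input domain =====

-- B replaces A's DFS flood fill (visited matrix + explicit stack) by a union-find over
-- flat cell indices: one pass unions each truthy cell with its up/left neighbours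
-- (larger root linked under smaller, so a root is its component's first row-major cell),
-- then a second pass groups cells by root via a root->slot dict.

-- ===== PORT A =====
-- Shared grid helpers (both Pythons read/write `g[r][c]` of rectangular Bool grids the
-- same way; every call below is either bounds-guarded first or at an in-range cell).
def pvCell (g : List (List Bool)) (r c : Int) : Bool :=
  (g.getD r.toNat []).getD c.toNat false

def pvMark (g : List (List Bool)) (r c : Int) : List (List Bool) :=
  g.set r.toNat ((g.getD r.toNat []).set c.toNat true)

-- A's `is_valid(r, c)`
def pvIsValidA (matrix visited : List (List Bool)) (rows cols r c : Int) : Bool :=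
  decide (0 ≤ r) && decide (r < rows) && decide (0 ≤ c) && decide (c < cols)
    && pvCell matrix r c && !pvCell visited r c

def pvDirsA : List (Int × Int) := [(-1, 0), (1, 0), (0, -1), (0, 1)]

-- A's `dfs`: explicit stack (head = top), pop, check visited, mark, push valid neighbours
-- in the order of A's direction table.  The fuel argument is only a totality guard.
def pvDfsA (matrix : List (List Bool)) (rows cols : Int) :
    Nat → List (Int × Int) → List (List Bool) → List (List Bool) →
    List (List Bool) × List (List Bool)
  | 0, _, visited, region => (visited, region)
  | _ + 1, [], visited, region => (visited, region)
  | fuel + 1, (x, y) :: rest, visited, region =>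
      if pvCell visited x y then
        pvDfsA matrix rows cols fuel rest visited region
      else
        pvDfsA matrix rows cols fuel
          (pvDirsA.foldl
            (fun st d =>
              if pvIsValidA matrix (pvMark visited x y) rows cols (x + d.1) (y + d.2) then
                (x + d.1, y + d.2) :: st
              else st)
            rest)
          (pvMark visited x y) (pvMark region x y)

def find_regions_as_arrays (matrix : List (List Bool)) : List (List (List Bool)) :=
  ((List.range matrix.length).foldl
    (fun acc (r : Nat) =>
      (List.range (matrix.headD []).length).foldl
        (fun acc (c : Nat) =>
          if pvCell matrix (r : Int) (c : Int) && !pvCell acc.1 (r : Int) (c : Int) then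
            ((pvDfsA matrix (matrix.length : Int) ((matrix.headD []).length : Int)
                (5 * matrix.length * (matrix.headD []).length + 5)
                [((r : Int), (c : Int))] acc.1
                (List.replicate matrix.length
                  (List.replicate (matrix.headD []).length false))).1,
             acc.2 ++ [(pvDfsA matrix (matrix.length : Int) ((matrix.headD []).length : Int)
                (5 * matrix.length * (matrix.headD []).length + 5)
                [((r : Int), (c : Int))] acc.1
                (List.replicate matrix.length
                  (List.replicate (matrix.headD []).length false))).2])
          else acc)
        acc)
    (List.replicate matrix.length (List.replicate (matrix.headD []).length false),
     ([] : List (List (List Bool))))).2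

-- ===== PORT B =====
-- B's `find(x)`: chase parent pointers until a fixpoint; the fuel argument is only a
-- totality guard (parents always decrease, so n+1 steps always reach the root).
def ufFind (parent : List Nat) : Nat → Nat → Nat
  | 0, x => x
  | fuel + 1, x =>
      if parent.getD x x = x then x else ufFind parent fuel (parent.getD x x)

-- B's `a, b = find(i), find(j); if a != b: parent[max(a, b)] = min(a, b)`
def ufUnion (n : Nat) (parent : List Nat) (i j : Nat) : List Nat :=
  if ufFind parent (n + 1) i ≠ ufFind parent (n + 1) j then
    parent.set (max (ufFind parent (n + 1) i) (ufFind parent (n + 1) j))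
      (min (ufFind parent (n + 1) i) (ufFind parent (n + 1) j))
  else parent

-- B's first pass body for cell i (r = i / cols, c = i % cols)
def ufStep (matrix : List (List Bool)) (R C : Nat) (parent : List Nat) (i : Nat) : List Nat :=
  if pvCell matrix ((i / C : Nat) : Int) ((i % C : Nat) : Int) then
    let parent1 :=
      if decide (0 < i / C) && pvCell matrix ((i / C - 1 : Nat) : Int) ((i % C : Nat) : Int) then
        ufUnion (R * C) parent i (i - C)
      else parent
    if decide (0 < i % C) && pvCell matrix ((i / C : Nat) : Int) ((i % C - 1 : Nat) : Int) then
      ufUnion (R * C) parent1 i (i - 1)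
    else parent1
  else parent

-- B's second pass: group cells by root, allocating a region array at a root's first
-- occurrence via the root->slot dict.
def ufCollect (matrix : List (List Bool)) (R C : Nat) (parent : List Nat) :
    List (List (List Bool)) :=
  ((List.range (R * C)).foldl
    (fun (acc : List (List (List Bool)) × PySem.Dict Nat Nat) i =>
      if pvCell matrix ((i / C : Nat) : Int) ((i % C : Nat) : Int) then
        let acc1 : List (List (List Bool)) × PySem.Dict Nat Nat :=
          if acc.2.contains (ufFind parent (R * C + 1) i) then acc
          else (acc.1 ++ [List.replicate R (List.replicate C false)],
                acc.2.insert (ufFind parent (R * C + 1) i) acc.1.length)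
        (acc1.1.set (acc1.2.getD (ufFind parent (R * C + 1) i) 0)
           (pvMark (acc1.1.getD (acc1.2.getD (ufFind parent (R * C + 1) i) 0) [])
             ((i / C : Nat) : Int) ((i % C : Nat) : Int)),
         acc1.2)
      else acc)
    ([], PySem.Dict.empty)).1

def find_regions_as_arrays_alt (matrix : List (List Bool)) : List (List (List Bool)) :=
  ufCollect matrix matrix.length (matrix.headD []).length
    ((List.range (matrix.length * (matrix.headD []).length)).foldl
      (ufStep matrix matrix.length (matrix.headD []).length)
      (List.range (matrix.length * (matrix.headD []).length)))

-- ===== PRECONDITION & SPEC =====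
-- Pre_ excludes exactly the inputs on which Python A raises IndexError: the empty matrix
-- (len(matrix[0])) and matrices with a row shorter than row 0 (matrix[r][c] for c < cols).
def Pre_find_regions_as_arrays (matrix : List (List Bool)) : Prop :=
  matrix ≠ [] ∧ ∀ row ∈ matrix, (matrix.headD []).length ≤ row.length

instance (matrix : List (List Bool)) : Decidable (Pre_find_regions_as_arrays matrix) := by
  unfold Pre_find_regions_as_arrays; infer_instance

def pvWitness_find_regions_as_arrays : List (List Bool) :=
  [[true, false, true], [true, true, false]]

def Spec_find_regions_as_arrays (matrix : List (List Bool)) (out : List (List (List Bool))) : Prop := out = find_regions_as_arrays_alt matrix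
instance (matrix : List (List Bool)) (out : List (List (List Bool))) : Decidable (Spec_find_regions_as_arrays matrix out) := by unfold Spec_find_regions_as_arrays; infer_instance

-- ===== CLAIM (what is proved, stated in full; the proofs are below) =====
def Claim_equal_find_regions_as_arrays : Prop := ∀ (matrix : List (List Bool)), Dom_find_regions_as_arrays matrix → Pre_find_regions_as_arrays matrix → Spec_find_regions_as_arrays matrix (find_regions_as_arrays matrix)

-- ===== LEMMAS AND PROOFS =====


-- The abstract worklist model used to characterise A's flood fill: a finite set of
-- visited cells plus a worklist, where the policy `mk` that builds the next worklist is
-- a parameter; its final visited set depends only on the MEMBERS the policy provides.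

def pvNbrs (p : Int × Int) : List (Int × Int) :=
  [(p.1 - 1, p.2), (p.1 + 1, p.2), (p.1, p.2 - 1), (p.1, p.2 + 1)]

def pvGood (matrix : List (List Bool)) (R C : Nat) (p : Int × Int) : Bool :=
  decide (0 ≤ p.1) && decide (p.1 < (R : Int)) && decide (0 ≤ p.2) && decide (p.2 < (C : Int))
    && pvCell matrix p.1 p.2

def pvRun (mk : (Int × Int) → Finset (Int × Int) → List (Int × Int) → List (Int × Int)) :
    Nat → Finset (Int × Int) → List (Int × Int) → Finset (Int × Int)
  | 0, V, _ => V
  | _ + 1, V, [] => V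
  | fuel + 1, V, p :: rest =>
      if p ∈ V then pvRun mk fuel V rest
      else pvRun mk fuel (insert p V) (mk p (insert p V) rest)

def pvRel (good : Int × Int → Bool) (V : Finset (Int × Int)) (a b : Int × Int) : Prop :=
  b ∈ pvNbrs a ∧ good b = true ∧ b ∉ V

def pvReach (good : Int × Int → Bool) (V : Finset (Int × Int)) (W : List (Int × Int))
    (q : Int × Int) : Prop :=
  ∃ s ∈ W, s ∉ V ∧ Relation.ReflTransGen (pvRel good V) s q

def pvU (R C : Nat) : Finset (Int × Int) :=
  (Finset.range R ×ˢ Finset.range C).image (fun rc => ((rc.1 : Int), (rc.2 : Int)))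

theorem pvRun_mono (mk) : ∀ (fuel : Nat) (V : Finset (Int × Int)) (W : List (Int × Int)),
    V ⊆ pvRun mk fuel V W := by
  intro fuel
  induction fuel with
  | zero => intro V W; simp [pvRun]
  | succ f ih =>
    intro V W
    cases W with
    | nil => simp [pvRun]
    | cons p rest =>
      by_cases hp : p ∈ V
      · simpa [pvRun, hp] using ih V rest
      · simp only [pvRun, if_neg hp]
        exact Finset.Subset.trans (Finset.subset_insert p V)
          (ih (insert p V) (mk p (insert p V) rest))

theorem pvRel_mono (good) {V V' : Finset (Int × Int)} (hVV : V ⊆ V') {a b : Int × Int}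
    (h : pvRel good V' a b) : pvRel good V a b :=
  ⟨h.1, h.2.1, fun hb => h.2.2 (hVV hb)⟩

theorem pvSurgery (good) (V : Finset (Int × Int)) (p : Int × Int) {s q : Int × Int}
    (h : Relation.ReflTransGen (pvRel good V) s q) :
    q = p ∨ (s ≠ p ∧ Relation.ReflTransGen (pvRel good (insert p V)) s q) ∨
      (∃ t, t ∈ pvNbrs p ∧ good t = true ∧ t ∉ insert p V ∧
        Relation.ReflTransGen (pvRel good (insert p V)) t q) := by
  induction h using Relation.ReflTransGen.head_induction_on with
  | refl =>
      by_cases hqp : q = p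
      · exact Or.inl hqp
      · exact Or.inr (Or.inl ⟨hqp, Relation.ReflTransGen.refl⟩)
  | head hrel htail ih =>
      rename_i a c
      rcases ih with h1 | ⟨hcp, hpath⟩ | ⟨t, ht1, ht2, ht3, htp⟩
      · exact Or.inl h1
      · have hcV' : c ∉ insert p V := fun hc =>
          (Finset.mem_insert.mp hc).elim (fun h => hcp h) (fun h => hrel.2.2 h)
        by_cases hap : a = p
        · exact Or.inr (Or.inr ⟨c, hap ▸ hrel.1, hrel.2.1, hcV', hpath⟩)
        · exact Or.inr (Or.inl ⟨hap,
            Relation.ReflTransGen.head ⟨hrel.1, hrel.2.1, hcV'⟩ hpath⟩)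
      · exact Or.inr (Or.inr ⟨t, ht1, ht2, ht3, htp⟩)

theorem pvRun_sound (good) (mk)
    (Hmem : ∀ p V rest x, good p = true →
      (x ∈ mk p V rest ↔ ((x ∈ pvNbrs p ∧ good x = true ∧ x ∉ V) ∨ x ∈ rest))) :
    ∀ (fuel : Nat) (V : Finset (Int × Int)) (W : List (Int × Int)),
      (∀ p ∈ W, good p = true) → ∀ q, q ∈ pvRun mk fuel V W →
        q ∈ V ∨ pvReach good V W q := by
  intro fuel
  induction fuel with
  | zero => intro V W hW q hq; exact Or.inl (by simpa [pvRun] using hq)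
  | succ f ih =>
    intro V W hW q hq
    cases W with
    | nil => exact Or.inl (by simpa [pvRun] using hq)
    | cons p rest =>
      by_cases hp : p ∈ V
      · rcases ih V rest (fun x hx => hW x (by simp [hx])) q
            (by simpa [pvRun, hp] using hq) with h | ⟨s, hs, hsV, hpath⟩
        · exact Or.inl h
        · exact Or.inr ⟨s, by simp [hs], hsV, hpath⟩
      · have hgoodp := hW p (by simp)
        have hW' : ∀ x ∈ mk p (insert p V) rest, good x = true := by
          intro x hx
          rcases (Hmem p (insert p V) rest x hgoodp).mp hx with ⟨_, hg, _⟩ | hx'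
          · exact hg
          · exact hW x (by simp [hx'])
        rcases ih (insert p V) (mk p (insert p V) rest) hW' q
            (by simpa [pvRun, hp] using hq) with h | ⟨s, hs, hsV', hpath⟩
        · rcases Finset.mem_insert.mp h with rfl | h'
          · exact Or.inr ⟨q, by simp, hp, Relation.ReflTransGen.refl⟩
          · exact Or.inl h'
        · have hpath' : Relation.ReflTransGen (pvRel good V) s q :=
            Relation.ReflTransGen.mono
              (fun a b h => pvRel_mono good (Finset.subset_insert p V) h) hpath
          have hsV : s ∉ V := fun h => hsV' (Finset.mem_insert_of_mem h)
          rcases (Hmem p (insert p V) rest s hgoodp).mp hs with ⟨hnb, hg, _⟩ | hs'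
          · exact Or.inr ⟨p, by simp, hp,
              Relation.ReflTransGen.head ⟨hnb, hg, hsV⟩ hpath'⟩
          · exact Or.inr ⟨s, by simp [hs'], hsV, hpath'⟩

theorem pvRun_complete (good) (mk) (U : Finset (Int × Int))
    (Hmem : ∀ p V rest x, good p = true →
      (x ∈ mk p V rest ↔ ((x ∈ pvNbrs p ∧ good x = true ∧ x ∉ V) ∨ x ∈ rest)))
    (Hlen : ∀ p V rest, (mk p V rest).length ≤ rest.length + 4)
    (HU : ∀ p, good p = true → p ∈ U) :
    ∀ (fuel : Nat) (V : Finset (Int × Int)) (W : List (Int × Int)),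
      (∀ p ∈ W, good p = true) → W.length + 5 * (U \ V).card ≤ fuel →
      ∀ q, pvReach good V W q → q ∈ pvRun mk fuel V W := by
  intro fuel
  induction fuel with
  | zero =>
    intro V W hW hlen q hreach
    rcases hreach with ⟨s, hs, _, _⟩
    have hW0 : W.length = 0 := by omega
    rw [List.length_eq_zero_iff] at hW0
    subst hW0; simp at hs
  | succ f ih =>
    intro V W hW hlen q hreach
    cases W with
    | nil => rcases hreach with ⟨s, hs, _⟩; simp at hs
    | cons p rest =>
      by_cases hp : p ∈ V
      · simp only [pvRun, if_pos hp]
        rcases hreach with ⟨s, hs, hsV, hpath⟩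
        rcases List.mem_cons.mp hs with rfl | hs'
        · exact absurd hp hsV
        · exact ih V rest (fun x hx => hW x (by simp [hx]))
            (by simp only [List.length_cons] at hlen; omega) q ⟨s, hs', hsV, hpath⟩
      · simp only [pvRun, if_neg hp]
        have hgoodp := hW p (by simp)
        have hpU : p ∈ U := HU p hgoodp
        have hpUV : p ∈ U \ V := Finset.mem_sdiff.mpr ⟨hpU, hp⟩
        have hcard : (U \ insert p V).card + 1 = (U \ V).card := by
          have h1 : U \ insert p V = (U \ V).erase p := by
            ext x
            simp only [Finset.mem_sdiff, Finset.mem_erase, Finset.mem_insert]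
            tauto
          rw [h1, Finset.card_erase_of_mem hpUV]
          have := Finset.card_pos.mpr ⟨p, hpUV⟩
          omega
        have hlen' : (mk p (insert p V) rest).length + 5 * (U \ insert p V).card ≤ f := by
          have := Hlen p (insert p V) rest
          simp only [List.length_cons] at hlen
          omega
        have hW' : ∀ x ∈ mk p (insert p V) rest, good x = true := by
          intro x hx
          rcases (Hmem p (insert p V) rest x hgoodp).mp hx with ⟨_, hg, _⟩ | hx'
          · exact hg
          · exact hW x (by simp [hx'])
        rcases hreach with ⟨s, hs, hsV, hpath⟩
        rcases pvSurgery good V p hpath with hqp | ⟨hsp, hpath'⟩ | ⟨t, ht1, ht2, ht3, htp⟩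
        · rw [hqp]
          exact pvRun_mono mk f (insert p V) _ (Finset.mem_insert_self p V)
        · have hsrest : s ∈ rest := by
            rcases List.mem_cons.mp hs with rfl | h
            · exact absurd rfl hsp
            · exact h
          have hsmem : s ∈ mk p (insert p V) rest :=
            (Hmem p (insert p V) rest s hgoodp).mpr (Or.inr hsrest)
          have hsV' : s ∉ insert p V := fun hc =>
            (Finset.mem_insert.mp hc).elim (fun h => hsp h) hsV
          exact ih (insert p V) _ hW' hlen' q ⟨s, hsmem, hsV', hpath'⟩
        · have htmem : t ∈ mk p (insert p V) rest :=
            (Hmem p (insert p V) rest t hgoodp).mpr (Or.inl ⟨ht1, ht2, ht3⟩)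
          exact ih (insert p V) _ hW' hlen' q ⟨t, htmem, ht3, htp⟩

theorem pvRun_eq_closure (good) (mk) (U : Finset (Int × Int))
    (Hmem : ∀ p V rest x, good p = true →
      (x ∈ mk p V rest ↔ ((x ∈ pvNbrs p ∧ good x = true ∧ x ∉ V) ∨ x ∈ rest)))
    (Hlen : ∀ p V rest, (mk p V rest).length ≤ rest.length + 4)
    (HU : ∀ p, good p = true → p ∈ U)
    (fuel : Nat) (V : Finset (Int × Int)) (W : List (Int × Int))
    (hW : ∀ p ∈ W, good p = true) (hfuel : W.length + 5 * (U \ V).card ≤ fuel) :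
    ∀ q, q ∈ pvRun mk fuel V W ↔ q ∈ V ∨ pvReach good V W q := by
  intro q
  constructor
  · exact fun h => pvRun_sound good mk Hmem fuel V W hW q h
  · rintro (h | h)
    · exact pvRun_mono mk fuel V W h
    · exact pvRun_complete good mk U Hmem Hlen HU fuel V W hW hfuel q h

-- ===== Grid/model coherence =====

def pvInb (R C : Nat) (p : Int × Int) : Prop :=
  0 ≤ p.1 ∧ p.1 < (R : Int) ∧ 0 ≤ p.2 ∧ p.2 < (C : Int)

def pvRect (R C : Nat) (g : List (List Bool)) : Prop :=
  g.length = R ∧ ∀ row ∈ g, row.length = C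

def pvCoh (R C : Nat) (g : List (List Bool)) (V : Finset (Int × Int)) : Prop :=
  pvRect R C g ∧ (∀ p ∈ V, pvInb R C p) ∧
    ∀ p : Int × Int, pvInb R C p → pvCell g p.1 p.2 = decide (p ∈ V)

theorem pvGood_inb {matrix R C p} (h : pvGood matrix R C p = true) : pvInb R C p := by
  simp only [pvGood, Bool.and_eq_true, decide_eq_true_eq] at h
  exact ⟨h.1.1.1.1, h.1.1.1.2, h.1.1.2, h.1.2⟩

theorem pvCell_replicate (R C : Nat) (x y : Int) :
    pvCell (List.replicate R (List.replicate C false)) x y = false := by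
  unfold pvCell
  simp only [List.getD_eq_getElem?_getD, List.getElem?_replicate]
  by_cases h : x.toNat < R
  · by_cases h2 : y.toNat < C <;> simp [h, h2, List.getElem?_replicate]
  · simp [h]

theorem pvCoh_empty (matrix : List (List Bool)) (R C : Nat) :
    pvCoh R C (List.replicate R (List.replicate C false)) ∅ := by
  refine ⟨⟨by simp, fun row hr => by rw [List.eq_of_mem_replicate hr]; simp⟩, by simp, ?_⟩
  intro p _
  simp [pvCell_replicate]

theorem pvRect_mark {R C : Nat} {g : List (List Bool)} (hrect : pvRect R C g)
    {p : Int × Int} (hp : pvInb R C p) : pvRect R C (pvMark g p.1 p.2) := by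
  obtain ⟨hlen, hrow⟩ := hrect
  obtain ⟨h1, h2, h3, h4⟩ := hp
  have hplt : p.1.toNat < g.length := by omega
  constructor
  · simp [pvMark, hlen]
  · intro row hr
    rcases List.mem_or_eq_of_mem_set hr with h | h
    · exact hrow _ h
    · subst h
      rw [List.length_set, List.getD_eq_getElem _ _ hplt]
      exact hrow _ (List.getElem_mem hplt)

theorem pvCell_mark {R C : Nat} {g : List (List Bool)} (hrect : pvRect R C g)
    {p q : Int × Int} (hp : pvInb R C p) (hq : pvInb R C q) :
    pvCell (pvMark g p.1 p.2) q.1 q.2 = (decide (q = p) || pvCell g q.1 q.2) := by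
  obtain ⟨hlen, hrow⟩ := hrect
  obtain ⟨hp1, hp2, hp3, hp4⟩ := hp
  obtain ⟨hq1, hq2, hq3, hq4⟩ := hq
  have hplt : p.1.toNat < g.length := by omega
  have hrowp : (g.getD p.1.toNat []).length = C := by
    rw [List.getD_eq_getElem _ _ hplt]
    exact hrow _ (List.getElem_mem hplt)
  have hrepr : ∀ (gg : List (List Bool)) (x y : Int),
      pvCell gg x y = ((gg[x.toNat]?.getD [])[y.toNat]?).getD false := by
    intro gg x y; simp [pvCell, List.getD_eq_getElem?_getD]
  rw [hrepr, hrepr]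
  unfold pvMark
  rw [List.getElem?_set]
  by_cases h1 : p.1.toNat = q.1.toNat
  · rw [if_pos h1, if_pos hplt]
    simp only [Option.getD_some]
    rw [List.getElem?_set]
    by_cases h2 : p.2.toNat = q.2.toNat
    · rw [if_pos h2, if_pos (by rw [hrowp]; omega)]
      have hqp : q = p := Prod.ext_iff.mpr ⟨by omega, by omega⟩
      simp [hqp]
    · rw [if_neg h2]
      have hqp : q ≠ p := fun h => h2 (by rw [h])
      simp only [hqp, decide_false, Bool.false_or]
      rw [List.getD_eq_getElem?_getD, h1]
  · rw [if_neg h1]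
    have hqp : q ≠ p := fun h => h1 (by rw [h])
    simp [hqp]

theorem pvCoh_mark {R C : Nat} {g : List (List Bool)} {V : Finset (Int × Int)}
    {p : Int × Int} (h : pvCoh R C g V) (hp : pvInb R C p) :
    pvCoh R C (pvMark g p.1 p.2) (insert p V) := by
  obtain ⟨hrect, hVinb, hcell⟩ := h
  refine ⟨pvRect_mark hrect hp, ?_, ?_⟩
  · intro x hx
    rcases Finset.mem_insert.mp hx with rfl | hx'
    · exact hp
    · exact hVinb x hx'
  · intro q hq
    rw [pvCell_mark hrect hp hq, hcell q hq]
    by_cases hqp : q = p <;> simp [hqp, Finset.mem_insert]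

theorem pvCell_nat (g : List (List Bool)) {i j : Nat} (h1 : i < g.length)
    (h2 : j < (g[i]'h1).length) : pvCell g (i : Int) (j : Int) = (g[i]'h1)[j]'h2 := by
  unfold pvCell
  simp only [Int.toNat_natCast]
  rw [List.getD_eq_getElem _ _ h1, List.getD_eq_getElem _ _ h2]

theorem pvCoh_ext {R C : Nat} {g1 g2 : List (List Bool)} {V : Finset (Int × Int)}
    (hg : pvCoh R C g1 V) (hh : pvCoh R C g2 V) : g1 = g2 := by
  obtain ⟨⟨hgl, hgr⟩, _, hgc⟩ := hg
  obtain ⟨⟨hhl, hhr⟩, _, hhc⟩ := hh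
  apply List.ext_getElem (by rw [hgl, hhl])
  intro i h1 h2
  apply List.ext_getElem
  · rw [hgr _ (List.getElem_mem h1), hhr _ (List.getElem_mem h2)]
  intro j hj1 hj2
  have hiR : i < R := hgl ▸ h1
  have hjC : j < C := by
    rw [hgr _ (List.getElem_mem h1)] at hj1; exact hj1
  have hq : pvInb R C ((i : Int), (j : Int)) := by
    refine ⟨by omega, by omega, by omega, by omega⟩
  have e := (hgc _ hq).trans (hhc _ hq).symm
  rw [pvCell_nat g1 h1 hj1, pvCell_nat g2 h2 hj2] at e
  exact e

-- ===== A's stack policy as a pvRun policy =====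

def pvMkA (matrix : List (List Bool)) (R C : Nat) (p : Int × Int)
    (V : Finset (Int × Int)) (rest : List (Int × Int)) : List (Int × Int) :=
  pvDirsA.foldl
    (fun st d =>
      if pvGood matrix R C (p.1 + d.1, p.2 + d.2) && !decide ((p.1 + d.1, p.2 + d.2) ∈ V) then
        (p.1 + d.1, p.2 + d.2) :: st
      else st)
    rest

theorem pv_mem_ite_cons {c : Prop} [Decidable c] {a x : Int × Int} {l : List (Int × Int)} :
    (x ∈ if c then a :: l else l) ↔ ((x = a ∧ c) ∨ x ∈ l) := by
  by_cases h : c <;> simp [h]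

theorem pvMkA_mem (matrix R C) : ∀ p V rest x, pvGood matrix R C p = true →
    (x ∈ pvMkA matrix R C p V rest ↔
      ((x ∈ pvNbrs p ∧ pvGood matrix R C x = true ∧ x ∉ V) ∨ x ∈ rest)) := by
  intro p V rest x _
  have e1 : p.1 + (-1 : Int) = p.1 - 1 := by ring
  have e2 : p.2 + (-1 : Int) = p.2 - 1 := by ring
  simp only [pvMkA, pvDirsA, List.foldl_cons, List.foldl_nil, e1, e2, add_zero,
    pv_mem_ite_cons, pvNbrs, List.mem_cons, List.not_mem_nil, or_false,
    Bool.and_eq_true, Bool.not_eq_true', decide_eq_false_iff_not]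
  constructor
  · rintro (⟨rfl, hg, hv⟩ | ⟨rfl, hg, hv⟩ | ⟨rfl, hg, hv⟩ | ⟨rfl, hg, hv⟩ | hr)
    · exact Or.inl ⟨by simp, hg, hv⟩
    · exact Or.inl ⟨by simp, hg, hv⟩
    · exact Or.inl ⟨by simp, hg, hv⟩
    · exact Or.inl ⟨by simp, hg, hv⟩
    · exact Or.inr hr
  · rintro (⟨(rfl | rfl | rfl | rfl), hg, hv⟩ | hr)
    · exact Or.inr (Or.inr (Or.inr (Or.inl ⟨rfl, hg, hv⟩)))
    · exact Or.inr (Or.inr (Or.inl ⟨rfl, hg, hv⟩))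
    · exact Or.inr (Or.inl ⟨rfl, hg, hv⟩)
    · exact Or.inl ⟨rfl, hg, hv⟩
    · exact Or.inr (Or.inr (Or.inr (Or.inr hr)))

theorem pvMkA_len (matrix R C) : ∀ p V rest, (pvMkA matrix R C p V rest).length ≤ rest.length + 4 := by
  intro p V rest
  simp only [pvMkA, pvDirsA, List.foldl_cons, List.foldl_nil]
  split_ifs <;> simp <;> omega

theorem pvGood_mem_U {matrix R C p} (h : pvGood matrix R C p = true) : p ∈ pvU R C := by
  obtain ⟨h1, h2, h3, h4⟩ := pvGood_inb h
  refine Finset.mem_image.mpr ⟨(p.1.toNat, p.2.toNat), ?_, ?_⟩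
  · simp only [Finset.mem_product, Finset.mem_range]
    constructor <;> omega
  · exact Prod.ext_iff.mpr ⟨by omega, by omega⟩

theorem pvU_card (R C : Nat) : (pvU R C).card = R * C := by
  have hinj : Function.Injective (fun rc : Nat × Nat => ((rc.1 : Int), (rc.2 : Int))) := by
    intro a b hab
    have hab' : ((a.1 : Int), (a.2 : Int)) = ((b.1 : Int), (b.2 : Int)) := hab
    obtain ⟨e1, e2⟩ := Prod.ext_iff.mp hab'
    have e1' : (a.1 : Int) = b.1 := e1
    have e2' : (a.2 : Int) = b.2 := e2
    exact Prod.ext_iff.mpr ⟨by exact_mod_cast e1', by exact_mod_cast e2'⟩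
  rw [pvU, Finset.card_image_of_injective _ hinj, Finset.card_product,
    Finset.card_range, Finset.card_range]

theorem pvValidA_eq {matrix : List (List Bool)} {R C : Nat} {vis : List (List Bool)}
    {V : Finset (Int × Int)} (hcoh : pvCoh R C vis V) (a b : Int) :
    pvIsValidA matrix vis (R : Int) (C : Int) a b =
      (pvGood matrix R C (a, b) && !decide ((a, b) ∈ V)) := by
  obtain ⟨hrect, hVinb, hcell⟩ := hcoh
  by_cases h1 : 0 ≤ a
  · by_cases h2 : a < (R : Int)
    · by_cases h3 : 0 ≤ b
      · by_cases h4 : b < (C : Int)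
        · have hc : pvCell vis a b = decide ((a, b) ∈ V) := hcell (a, b) ⟨h1, h2, h3, h4⟩
          simp [pvIsValidA, pvGood, h1, h2, h3, h4, hc]
        · simp [pvIsValidA, pvGood, h4]
      · simp [pvIsValidA, pvGood, h3]
    · simp [pvIsValidA, pvGood, h2]
  · simp [pvIsValidA, pvGood, h1]

theorem pvCard_insert {R C : Nat} {V : Finset (Int × Int)} {p : Int × Int}
    (hpUV : p ∈ pvU R C \ V) :
    (pvU R C \ insert p V).card + 1 = (pvU R C \ V).card := by
  have h1 : pvU R C \ insert p V = (pvU R C \ V).erase p := by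
    ext z
    simp only [Finset.mem_sdiff, Finset.mem_erase, Finset.mem_insert]
    tauto
  rw [h1, Finset.card_erase_of_mem hpUV]
  have := Finset.card_pos.mpr ⟨p, hpUV⟩
  omega

theorem pvSets_insert {Rg V Run : Finset (Int × Int)} {p : Int × Int}
    (hpRun : p ∈ Run) (hp : p ∉ V) :
    insert p Rg ∪ (Run \ insert p V) = Rg ∪ (Run \ V) := by
  ext z
  by_cases hz : z = p
  · subst hz; simp [hpRun, hp]
  · simp only [Finset.mem_union, Finset.mem_insert, Finset.mem_sdiff, hz, false_or]

theorem pvDfsA_bridge (matrix : List (List Bool)) (R C : Nat) :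
    ∀ (fuel : Nat) (W : List (Int × Int)) vis reg (V Rg : Finset (Int × Int)),
      pvCoh R C vis V → pvCoh R C reg Rg →
      (∀ p ∈ W, pvGood matrix R C p = true) →
      W.length + 5 * ((pvU R C \ V).card) ≤ fuel →
      pvCoh R C (pvDfsA matrix (R : Int) (C : Int) fuel W vis reg).1
          (pvRun (pvMkA matrix R C) fuel V W) ∧
        pvCoh R C (pvDfsA matrix (R : Int) (C : Int) fuel W vis reg).2
          (Rg ∪ (pvRun (pvMkA matrix R C) fuel V W \ V)) := by
  intro fuel
  induction fuel with
  | zero =>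
    intro W vis reg V Rg hv hr hW hlen
    have hW0 : W = [] := by
      have h0 : W.length = 0 := by omega
      rwa [List.length_eq_zero_iff] at h0
    subst hW0
    simp only [pvDfsA, pvRun]
    exact ⟨hv, by simpa using hr⟩
  | succ f ih =>
    intro W vis reg V Rg hv hr hW hlen
    cases W with
    | nil =>
      simp only [pvDfsA, pvRun]
      exact ⟨hv, by simpa using hr⟩
    | cons p rest =>
      obtain ⟨x, y⟩ := p
      have hgood : pvGood matrix R C (x, y) = true := hW (x, y) (by simp)
      have hinb := pvGood_inb hgood
      by_cases hp : (x, y) ∈ V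
      · have hcv : pvCell vis x y = true := by simpa [hp] using hv.2.2 (x, y) hinb
        have hstep : pvDfsA matrix (R : Int) (C : Int) (f + 1) ((x, y) :: rest) vis reg
            = pvDfsA matrix (R : Int) (C : Int) f rest vis reg := by
          simp [pvDfsA, hcv]
        have hrun : pvRun (pvMkA matrix R C) (f + 1) V ((x, y) :: rest)
            = pvRun (pvMkA matrix R C) f V rest := by
          simp [pvRun, hp]
        rw [hstep, hrun]
        exact ih rest vis reg V Rg hv hr (fun q hq => hW q (by simp [hq]))
          (by simp only [List.length_cons] at hlen; omega)
      · have hcv : pvCell vis x y = false := by simpa [hp] using hv.2.2 (x, y) hinb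
        have hv' : pvCoh R C (pvMark vis x y) (insert (x, y) V) := pvCoh_mark hv hinb
        have hr' : pvCoh R C (pvMark reg x y) (insert (x, y) Rg) := pvCoh_mark hr hinb
        have hstack : (pvDirsA.foldl (fun st d =>
              if pvIsValidA matrix (pvMark vis x y) (R : Int) (C : Int) (x + d.1) (y + d.2) then
                (x + d.1, y + d.2) :: st else st) rest)
            = pvMkA matrix R C (x, y) (insert (x, y) V) rest := by
          unfold pvMkA
          congr 1
          funext st d
          rw [pvValidA_eq hv' (x + d.1) (y + d.2)]
        have hstep : pvDfsA matrix (R : Int) (C : Int) (f + 1) ((x, y) :: rest) vis reg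
            = pvDfsA matrix (R : Int) (C : Int) f
                (pvMkA matrix R C (x, y) (insert (x, y) V) rest)
                (pvMark vis x y) (pvMark reg x y) := by
          rw [← hstack]; simp [pvDfsA, hcv]
        have hrun : pvRun (pvMkA matrix R C) (f + 1) V ((x, y) :: rest)
            = pvRun (pvMkA matrix R C) f (insert (x, y) V)
                (pvMkA matrix R C (x, y) (insert (x, y) V) rest) := by
          simp [pvRun, hp]
        rw [hstep, hrun]
        have hpUV : (x, y) ∈ pvU R C \ V :=
          Finset.mem_sdiff.mpr ⟨pvGood_mem_U hgood, hp⟩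
        have hcard := pvCard_insert hpUV
        have hW' : ∀ q ∈ pvMkA matrix R C (x, y) (insert (x, y) V) rest,
            pvGood matrix R C q = true := by
          intro q hq
          rcases (pvMkA_mem matrix R C (x, y) (insert (x, y) V) rest q hgood).mp hq with
            ⟨_, hg, _⟩ | hq'
          · exact hg
          · exact hW q (by simp [hq'])
        have hlen' : (pvMkA matrix R C (x, y) (insert (x, y) V) rest).length
            + 5 * ((pvU R C \ insert (x, y) V).card) ≤ f := by
          have := pvMkA_len matrix R C (x, y) (insert (x, y) V) rest
          simp only [List.length_cons] at hlen
          omega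
        obtain ⟨ch1, ch2⟩ := ih _ (pvMark vis x y) (pvMark reg x y) (insert (x, y) V)
          (insert (x, y) Rg) hv' hr' hW' hlen'
        refine ⟨ch1, ?_⟩
        have hpRun : (x, y) ∈ pvRun (pvMkA matrix R C) f (insert (x, y) V)
            (pvMkA matrix R C (x, y) (insert (x, y) V) rest) :=
          pvRun_mono _ _ _ _ (Finset.mem_insert_self _ _)
        rwa [pvSets_insert hpRun hp] at ch2

-- ===== A flattened to a row-major fold =====

theorem pv_foldl_flatMap {α β γ : Type} (f : γ → β → γ) (g : α → List β) :
    ∀ (l : List α) (s : γ), (l.flatMap g).foldl f s = l.foldl (fun s a => (g a).foldl f s) s := by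
  intro l
  induction l with
  | nil => intro s; simp
  | cons a t ih => intro s; simp [List.flatMap_cons, List.foldl_append, ih]

theorem pv_enum (R C : Nat) :
    (List.range (R * C)).map (fun i => (i / C, i % C)) =
      (List.range R).flatMap (fun r => (List.range C).map (fun c => (r, c))) := by
  induction R with
  | zero => simp
  | succ r ih =>
    have hmul : (r + 1) * C = r * C + C := by ring
    rw [List.range_succ, List.flatMap_append, ← ih, hmul, List.range_add,
      List.map_append, List.map_map]
    congr 1
    simp only [List.flatMap_cons, List.flatMap_nil, List.append_nil]
    apply List.map_congr_left
    intro j hj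
    simp only [List.mem_range] at hj
    have hC : 0 < C := lt_of_le_of_lt (Nat.zero_le j) hj
    have h1 : (r * C + j) / C = r := by
      rw [Nat.add_comm, Nat.mul_comm, Nat.add_mul_div_left j r hC, Nat.div_eq_of_lt hj,
        Nat.zero_add]
    have h2 : (r * C + j) % C = j := by
      rw [Nat.add_comm, Nat.mul_comm, Nat.add_mul_mod_self_left, Nat.mod_eq_of_lt hj]
    simp only [Function.comp]
    exact Prod.ext_iff.mpr ⟨h1, h2⟩

def pvLP (R C : Nat) : List (Nat × Nat) :=
  (List.range R).flatMap (fun r => (List.range C).map (fun c => (r, c)))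

def pvInit (R C : Nat) : List (List Bool) × List (List (List Bool)) :=
  (List.replicate R (List.replicate C false), [])

def pvStepA (matrix : List (List Bool)) (R C : Nat)
    (acc : List (List Bool) × List (List (List Bool))) (rc : Nat × Nat) :
    List (List Bool) × List (List (List Bool)) :=
  if pvCell matrix (rc.1 : Int) (rc.2 : Int) && !pvCell acc.1 (rc.1 : Int) (rc.2 : Int) then
    ((pvDfsA matrix (R : Int) (C : Int) (5 * R * C + 5) [((rc.1 : Int), (rc.2 : Int))] acc.1
        (List.replicate R (List.replicate C false))).1,
     acc.2 ++ [(pvDfsA matrix (R : Int) (C : Int) (5 * R * C + 5) [((rc.1 : Int), (rc.2 : Int))] acc.1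
        (List.replicate R (List.replicate C false))).2])
  else acc

theorem pvPortA_eq (matrix : List (List Bool)) :
    find_regions_as_arrays matrix
      = ((pvLP matrix.length (matrix.headD []).length).foldl
          (pvStepA matrix matrix.length (matrix.headD []).length)
          (pvInit matrix.length (matrix.headD []).length)).2 := by
  have h := pv_foldl_flatMap (pvStepA matrix matrix.length (matrix.headD []).length)
    (fun r => (List.range (matrix.headD []).length).map (fun c => (r, c)))
    (List.range matrix.length) (pvInit matrix.length (matrix.headD []).length)
  have h2 : ∀ (r : Nat) (acc : List (List Bool) × List (List (List Bool))),
      ((List.range (matrix.headD []).length).map (fun c => (r, c))).foldl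
          (pvStepA matrix matrix.length (matrix.headD []).length) acc
        = (List.range (matrix.headD []).length).foldl
            (fun acc c => pvStepA matrix matrix.length (matrix.headD []).length acc (r, c)) acc :=
    fun r acc => List.foldl_map
  simp only [h2] at h
  calc find_regions_as_arrays matrix
      = ((List.range matrix.length).foldl
          (fun s r => (List.range (matrix.headD []).length).foldl
            (fun acc c => pvStepA matrix matrix.length (matrix.headD []).length acc (r, c)) s)
          (pvInit matrix.length (matrix.headD []).length)).2 := by
        simp only [find_regions_as_arrays, pvStepA, pvInit]
    _ = _ := congrArg Prod.snd h.symm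

theorem pvPortA_flat (matrix : List (List Bool)) :
    find_regions_as_arrays matrix
      = ((List.range (matrix.length * (matrix.headD []).length)).foldl
          (fun acc i => pvStepA matrix matrix.length (matrix.headD []).length acc
            (i / (matrix.headD []).length, i % (matrix.headD []).length))
          (pvInit matrix.length (matrix.headD []).length)).2 := by
  rw [pvPortA_eq]
  unfold pvLP
  rw [← pv_enum, List.foldl_map]

-- ===== Flat-index view of the grid =====

def pvToP (C i : Nat) : Int × Int := (((i / C : Nat) : Int), ((i % C : Nat) : Int))

def pvGoodN (matrix : List (List Bool)) (R C : Nat) (i : Nat) : Bool :=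
  pvGood matrix R C (pvToP C i)

def pvNAdj (matrix : List (List Bool)) (R C : Nat) (i j : Nat) : Prop :=
  pvGoodN matrix R C i = true ∧ pvGoodN matrix R C j = true ∧ pvToP C j ∈ pvNbrs (pvToP C i)

def pvNConn (matrix : List (List Bool)) (R C : Nat) : Nat → Nat → Prop :=
  Relation.ReflTransGen (pvNAdj matrix R C)

def pvParentF (matrix : List (List Bool)) (R C : Nat) : List Nat :=
  (List.range (R * C)).foldl (ufStep matrix R C) (List.range (R * C))

def pvRootF (matrix : List (List Bool)) (R C : Nat) (i : Nat) : Nat :=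
  ufFind (pvParentF matrix R C) (R * C + 1) i

def pvCompP (matrix : List (List Bool)) (R C : Nat) (m : Nat) : Finset (Int × Int) :=
  pvRun (pvMkA matrix R C) (5 * R * C + 5) ∅ [pvToP C m]

def pvSeeds (matrix : List (List Bool)) (R C : Nat) (k : Nat) : List Nat :=
  (List.range k).filter (fun m => pvGoodN matrix R C m && (pvRootF matrix R C m == m))

def pvGridOf (R C : Nat) (S : Finset (Int × Int)) : List (List Bool) :=
  (List.range R).map (fun (r : Nat) =>
    (List.range C).map (fun (c : Nat) => decide ((((r : Nat) : Int), ((c : Nat) : Int)) ∈ S)))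

theorem pvFlat_divmod {C a b : Nat} (hb : b < C) : (a * C + b) / C = a ∧ (a * C + b) % C = b := by
  have hC : 0 < C := Nat.lt_of_le_of_lt (Nat.zero_le b) hb
  constructor
  · rw [show a * C + b = C * a + b by ring, Nat.mul_add_div hC, Nat.div_eq_of_lt hb,
      Nat.add_zero]
  · rw [show a * C + b = C * a + b by ring, Nat.mul_add_mod, Nat.mod_eq_of_lt hb]

theorem pvToP_inj {C i j : Nat} (h : pvToP C i = pvToP C j) : i = j := by
  unfold pvToP at h
  obtain ⟨h1, h2⟩ := Prod.ext_iff.mp h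
  have h1' : i / C = j / C := Nat.cast_injective h1
  have h2' : i % C = j % C := Nat.cast_injective h2
  have e1 := Nat.div_add_mod i C
  have e2 := Nat.div_add_mod j C
  rw [← e1, ← e2, h1', h2']

theorem pvGoodN_lt {matrix : List (List Bool)} {R C i : Nat}
    (h : pvGoodN matrix R C i = true) : i < R * C := by
  obtain ⟨h1, h2, h3, h4⟩ := pvGood_inb h
  simp only [pvToP] at h2 h4
  have h2' : i / C < R := by exact_mod_cast h2
  have h4' : i % C < C := by exact_mod_cast h4
  have hC : 0 < C := Nat.lt_of_le_of_lt (Nat.zero_le _) h4'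
  exact (Nat.div_lt_iff_lt_mul hC).mp h2'

theorem pvGoodN_cell {matrix : List (List Bool)} {R C i : Nat} (h : i < R * C) :
    pvGoodN matrix R C i = pvCell matrix ((i / C : Nat) : Int) ((i % C : Nat) : Int) := by
  have hC : 0 < C := by
    rcases Nat.eq_zero_or_pos C with rfl | h'
    · simp at h
    · exact h'
  have hdiv : i / C < R := by
    rw [Nat.div_lt_iff_lt_mul hC]; exact h
  have hmod : i % C < C := Nat.mod_lt _ hC
  have b1 : (0 : Int) ≤ (i : Int) / (C : Int) := by
    rw [← Int.natCast_div]; exact Int.natCast_nonneg _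
  have b2 : (i : Int) / (C : Int) < (R : Int) := by
    rw [← Int.natCast_div]; exact_mod_cast hdiv
  have b3 : (0 : Int) ≤ (i : Int) % (C : Int) := by
    rw [← Int.natCast_mod]; exact Int.natCast_nonneg _
  have b4 : (i : Int) % (C : Int) < (C : Int) := by
    rw [← Int.natCast_mod]; exact_mod_cast hmod
  simp [pvGoodN, pvGood, pvToP, b1, b2, b3, b4, Int.natCast_div, Int.natCast_mod]

theorem pvPair_flat {matrix : List (List Bool)} {R C : Nat} {q : Int × Int}
    (h : pvGood matrix R C q = true) :
    ∃ j, q = pvToP C j ∧ pvGoodN matrix R C j = true := by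
  obtain ⟨h1, h2, h3, h4⟩ := pvGood_inb h
  have h4' : q.2.toNat < C := by omega
  obtain ⟨hd, hm⟩ := pvFlat_divmod (C := C) (a := q.1.toNat) h4'
  have hq : q = pvToP C (q.1.toNat * C + q.2.toNat) := by
    unfold pvToP
    rw [hd, hm]
    exact Prod.ext_iff.mpr ⟨by omega, by omega⟩
  exact ⟨q.1.toNat * C + q.2.toNat, hq, by rw [pvGoodN, ← hq]; exact h⟩

theorem pvNbrs_symm {p q : Int × Int} : q ∈ pvNbrs p ↔ p ∈ pvNbrs q := by
  obtain ⟨a, b⟩ := p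
  obtain ⟨c, d⟩ := q
  simp only [pvNbrs, List.mem_cons, List.not_mem_nil, or_false, Prod.mk.injEq]
  omega

theorem pvNAdj_symm (matrix : List (List Bool)) (R C : Nat) :
    Symmetric (pvNAdj matrix R C) := by
  intro i j ⟨h1, h2, h3⟩
  exact ⟨h2, h1, pvNbrs_symm.mp h3⟩

theorem pvNConn_symm (matrix : List (List Bool)) (R C : Nat) :
    Symmetric (pvNConn matrix R C) :=
  Relation.ReflTransGen.symmetric (pvNAdj_symm matrix R C)

theorem pvNConn_good {matrix : List (List Bool)} {R C i j : Nat}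
    (h : pvGoodN matrix R C i = true) (hc : pvNConn matrix R C i j) :
    pvGoodN matrix R C j = true := by
  induction hc with
  | refl => exact h
  | tail _ hadj _ => exact hadj.2.1


-- ===== Union-find basics =====

def pvUF1 (parent : List Nat) : Prop := ∀ x, parent.getD x x ≤ x

def pvRootp (parent : List Nat) (x : Nat) : Nat := ufFind parent (x + 1) x

theorem ufFind_succ (parent : List Nat) (f x : Nat) :
    ufFind parent (f + 1) x
      = if parent.getD x x = x then x else ufFind parent f (parent.getD x x) := rfl

theorem pvUfFind_eq (parent : List Nat) (h1 : pvUF1 parent) :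
    ∀ x f, x + 1 ≤ f → ufFind parent f x = pvRootp parent x := by
  intro x
  induction x using Nat.strong_induction_on with
  | _ x ih =>
    intro f hf
    obtain ⟨f', rfl⟩ : ∃ f', f = f' + 1 := ⟨f - 1, by omega⟩
    rw [ufFind_succ]
    by_cases hp : parent.getD x x = x
    · rw [if_pos hp, pvRootp, ufFind_succ, if_pos hp]
    · have hlt : parent.getD x x < x := lt_of_le_of_ne (h1 x) hp
      rw [if_neg hp, pvRootp, ufFind_succ, if_neg hp]
      rw [ih _ hlt f' (by omega), ih _ hlt x (by omega)]

theorem pvRootp_step (parent : List Nat) (h1 : pvUF1 parent) {x : Nat}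
    (hp : parent.getD x x ≠ x) :
    pvRootp parent x = pvRootp parent (parent.getD x x) := by
  have hlt : parent.getD x x < x := lt_of_le_of_ne (h1 x) hp
  rw [pvRootp, ufFind_succ, if_neg hp, pvUfFind_eq parent h1 _ x (by omega)]

theorem pvRootp_of_root (parent : List Nat) {r : Nat} (hr : parent.getD r r = r) :
    pvRootp parent r = r := by
  rw [pvRootp, ufFind_succ, if_pos hr]

theorem pvRootp_root (parent : List Nat) (h1 : pvUF1 parent) :
    ∀ x, parent.getD (pvRootp parent x) (pvRootp parent x) = pvRootp parent x := by
  intro x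
  induction x using Nat.strong_induction_on with
  | _ x ih =>
    by_cases hp : parent.getD x x = x
    · rw [pvRootp_of_root parent hp]; exact hp
    · have hlt : parent.getD x x < x := lt_of_le_of_ne (h1 x) hp
      rw [pvRootp_step parent h1 hp]
      exact ih _ hlt

theorem pvRootp_le (parent : List Nat) (h1 : pvUF1 parent) :
    ∀ x, pvRootp parent x ≤ x := by
  intro x
  induction x using Nat.strong_induction_on with
  | _ x ih =>
    by_cases hp : parent.getD x x = x
    · rw [pvRootp_of_root parent hp]
    · have hlt : parent.getD x x < x := lt_of_le_of_ne (h1 x) hp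
      rw [pvRootp_step parent h1 hp]
      exact le_trans (ih _ hlt) (le_of_lt hlt)

theorem pvGetD_set {l : List Nat} {M m x : Nat} (hM : M < l.length) :
    (l.set M m).getD x x = if x = M then m else l.getD x x := by
  by_cases h : x = M
  · subst h
    simp [List.getD_eq_getElem?_getD, List.getElem?_set, hM]
  · have hne : M ≠ x := fun hc => h hc.symm
    simp [List.getD_eq_getElem?_getD, List.getElem?_set, hne]
    exact fun hc => absurd hc h

theorem pvUF1_set {parent : List Nat} (h1 : pvUF1 parent) {M m : Nat} (hm : m < M)
    (hM : M < parent.length) : pvUF1 (parent.set M m) := by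
  intro x
  rw [pvGetD_set hM]
  by_cases h : x = M
  · subst h; rw [if_pos rfl]; omega
  · simp only [h, if_false]; exact h1 x

theorem pvRootp_set (parent : List Nat) (h1 : pvUF1 parent) {M m : Nat}
    (hm : m < M) (hM : M < parent.length) (hMr : parent.getD M M = M)
    (hmr : parent.getD m m = m) :
    ∀ x, pvRootp (parent.set M m) x = if pvRootp parent x = M then m else pvRootp parent x := by
  have h1' : pvUF1 (parent.set M m) := pvUF1_set h1 hm hM
  intro x
  induction x using Nat.strong_induction_on with
  | _ x ih =>
    by_cases hxM : x = M
    · subst hxM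
      have hpx : (parent.set x m).getD x x = m := by rw [pvGetD_set hM]; simp
      have hne : (parent.set x m).getD x x ≠ x := by rw [hpx]; omega
      rw [pvRootp_step _ h1' hne, hpx, ih m hm, pvRootp_of_root parent hmr,
        pvRootp_of_root parent hMr]
      simp [Nat.ne_of_lt hm]
    · have hpx : (parent.set M m).getD x x = parent.getD x x := by
        rw [pvGetD_set hM]; simp [hxM]
      by_cases hp : parent.getD x x = x
      · have : pvRootp (parent.set M m) x = x := pvRootp_of_root _ (by rw [hpx]; exact hp)
        rw [this, pvRootp_of_root parent hp]
        simp [hxM]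
      · have hlt : parent.getD x x < x := lt_of_le_of_ne (h1 x) hp
        have hne' : (parent.set M m).getD x x ≠ x := by rw [hpx]; exact hp
        rw [pvRootp_step _ h1' hne', hpx, ih _ hlt, pvRootp_step parent h1 hp]


-- ===== The edges B's first pass unions, and closure-extension lemmas =====

def pvUpE (matrix : List (List Bool)) (R C : Nat) (a b : Nat) : Prop :=
  pvGoodN matrix R C a = true ∧ pvGoodN matrix R C b = true ∧ C ≤ a ∧ b + C = a

def pvLeftE (matrix : List (List Bool)) (R C : Nat) (a b : Nat) : Prop :=
  pvGoodN matrix R C a = true ∧ pvGoodN matrix R C b = true ∧ a % C ≠ 0 ∧ b + 1 = a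

def pvEk (matrix : List (List Bool)) (R C k a b : Nat) : Prop :=
  a < k ∧ (pvUpE matrix R C a b ∨ pvLeftE matrix R C a b)

def pvSEk (matrix : List (List Bool)) (R C k : Nat) (a b : Nat) : Prop :=
  pvEk matrix R C k a b ∨ pvEk matrix R C k b a

def pvRk (matrix : List (List Bool)) (R C k : Nat) : Nat → Nat → Prop :=
  Relation.ReflTransGen (pvSEk matrix R C k)

theorem pvSEk_symm (matrix : List (List Bool)) (R C k : Nat) :
    Symmetric (pvSEk matrix R C k) := by
  intro u v h
  rcases h with h | h
  · exact Or.inr h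
  · exact Or.inl h

theorem pvRTG_congr {α : Type} {r s : α → α → Prop} (h : ∀ x y, r x y ↔ s x y) (x y : α) :
    Relation.ReflTransGen r x y ↔ Relation.ReflTransGen s x y :=
  ⟨fun hr => hr.mono (fun u v hu => (h u v).mp hu),
   fun hs => hs.mono (fun u v hu => (h u v).mpr hu)⟩

theorem pvRk_zero (matrix : List (List Bool)) (R C : Nat) (x y : Nat) :
    pvRk matrix R C 0 x y ↔ x = y := by
  constructor
  · intro h
    induction h with
    | refl => rfl
    | tail _ hstep ih =>
      rcases hstep with ⟨h0, _⟩ | ⟨h0, _⟩ <;> omega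
  · rintro rfl; exact Relation.ReflTransGen.refl

-- Adding the (symmetrised) edge {a, b} to a relation: how the closure decomposes.
theorem pvRTG_ext {α : Type} {S : α → α → Prop} (a b : α) (x y : α) :
    Relation.ReflTransGen (fun u v => S u v ∨ (u = a ∧ v = b) ∨ (u = b ∧ v = a)) x y ↔
      (Relation.ReflTransGen S x y ∨
        (Relation.ReflTransGen S x a ∧ Relation.ReflTransGen S b y) ∨
        (Relation.ReflTransGen S x b ∧ Relation.ReflTransGen S a y)) := by
  constructor
  · intro h
    induction h with
    | refl => exact Or.inl Relation.ReflTransGen.refl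
    | tail hxy hstep ih =>
      rcases hstep with hs | ⟨rfl, rfl⟩ | ⟨rfl, rfl⟩
      · rcases ih with h1 | ⟨h1, h2⟩ | ⟨h1, h2⟩
        · exact Or.inl (h1.tail hs)
        · exact Or.inr (Or.inl ⟨h1, h2.tail hs⟩)
        · exact Or.inr (Or.inr ⟨h1, h2.tail hs⟩)
      · rcases ih with h1 | ⟨h1, h2⟩ | ⟨h1, h2⟩
        · exact Or.inr (Or.inl ⟨h1, Relation.ReflTransGen.refl⟩)
        · exact Or.inr (Or.inl ⟨h1, Relation.ReflTransGen.refl⟩)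
        · exact Or.inl h1
      · rcases ih with h1 | ⟨h1, h2⟩ | ⟨h1, h2⟩
        · exact Or.inr (Or.inr ⟨h1, Relation.ReflTransGen.refl⟩)
        · exact Or.inl h1
        · exact Or.inr (Or.inr ⟨h1, Relation.ReflTransGen.refl⟩)
  · have e1 : Relation.ReflTransGen
        (fun u v => S u v ∨ (u = a ∧ v = b) ∨ (u = b ∧ v = a)) a b :=
      Relation.ReflTransGen.single (Or.inr (Or.inl ⟨rfl, rfl⟩))
    have e2 : Relation.ReflTransGen
        (fun u v => S u v ∨ (u = a ∧ v = b) ∨ (u = b ∧ v = a)) b a :=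
      Relation.ReflTransGen.single (Or.inr (Or.inr ⟨rfl, rfl⟩))
    rintro (h | ⟨h1, h2⟩ | ⟨h1, h2⟩)
    · exact h.mono (fun u v hs => Or.inl hs)
    · exact ((h1.mono (fun u v hs => Or.inl hs)).trans e1).trans
        (h2.mono (fun u v hs => Or.inl hs))
    · exact ((h1.mono (fun u v hs => Or.inl hs)).trans e2).trans
        (h2.mono (fun u v hs => Or.inl hs))

-- Roots agree across a closure path (uses the min-invariant twice).
theorem pvRoot_eq_of_rel {S : Nat → Nat → Prop} (hSsym : Symmetric S)
    (parent : List Nat)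
    (hinv : ∀ i, Relation.ReflTransGen S i (pvRootp parent i) ∧
      ∀ j, Relation.ReflTransGen S i j → pvRootp parent i ≤ j)
    {x y : Nat} (h : Relation.ReflTransGen S x y) :
    pvRootp parent x = pvRootp parent y := by
  have hyx : Relation.ReflTransGen S y x := (Relation.ReflTransGen.symmetric hSsym) h
  have h1 : pvRootp parent x ≤ pvRootp parent y :=
    (hinv x).2 _ (h.trans (hinv y).1)
  have h2 : pvRootp parent y ≤ pvRootp parent x :=
    (hinv y).2 _ (hyx.trans (hinv x).1)
  omega

-- The union step preserves the invariant, for the closure extended by edge {a, b}.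
theorem pvUnion_lemma (n : Nat) (S : Nat → Nat → Prop) (hSsym : Symmetric S)
    (parent : List Nat) (hlen : parent.length = n) (h1 : pvUF1 parent)
    (hinv : ∀ i, Relation.ReflTransGen S i (pvRootp parent i) ∧
      ∀ j, Relation.ReflTransGen S i j → pvRootp parent i ≤ j)
    (a b : Nat) (ha : a < n) (hb : b < n) :
    (ufUnion n parent a b).length = n ∧ pvUF1 (ufUnion n parent a b) ∧
      ∀ i, Relation.ReflTransGen
             (fun u v => S u v ∨ (u = a ∧ v = b) ∨ (u = b ∧ v = a)) i
             (pvRootp (ufUnion n parent a b) i) ∧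
           ∀ j, Relation.ReflTransGen
               (fun u v => S u v ∨ (u = a ∧ v = b) ∨ (u = b ∧ v = a)) i j →
             pvRootp (ufUnion n parent a b) i ≤ j := by
  have hfa : ufFind parent (n + 1) a = pvRootp parent a :=
    pvUfFind_eq parent h1 a (n + 1) (by omega)
  have hfb : ufFind parent (n + 1) b = pvRootp parent b :=
    pvUfFind_eq parent h1 b (n + 1) (by omega)
  have hembed : ∀ {x y : Nat}, Relation.ReflTransGen S x y →
      Relation.ReflTransGen (fun u v => S u v ∨ (u = a ∧ v = b) ∨ (u = b ∧ v = a)) x y :=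
    fun h => h.mono (fun u v hs => Or.inl hs)
  by_cases hne : pvRootp parent a = pvRootp parent b
  · have hskip : ufUnion n parent a b = parent := by
      unfold ufUnion
      rw [hfa, hfb]
      simp [hne]
    rw [hskip]
    have hab : Relation.ReflTransGen S a b :=
      (hinv a).1.trans (hne ▸ (Relation.ReflTransGen.symmetric hSsym) (hinv b).1)
    have hba : Relation.ReflTransGen S b a := (Relation.ReflTransGen.symmetric hSsym) hab
    refine ⟨hlen, h1, fun i => ⟨hembed (hinv i).1, ?_⟩⟩
    intro j hj
    rcases (pvRTG_ext a b i j).mp hj with h2 | ⟨h2, h3⟩ | ⟨h2, h3⟩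
    · exact (hinv i).2 j h2
    · exact (hinv i).2 j ((h2.trans hab).trans h3)
    · exact (hinv i).2 j ((h2.trans hba).trans h3)
  · have hM_root := pvRootp_root parent h1
    have hra_le : pvRootp parent a ≤ a := pvRootp_le parent h1 a
    have hrb_le : pvRootp parent b ≤ b := pvRootp_le parent h1 b
    have hset : ufUnion n parent a b
        = parent.set (max (pvRootp parent a) (pvRootp parent b))
            (min (pvRootp parent a) (pvRootp parent b)) := by
      unfold ufUnion
      rw [hfa, hfb]
      simp [hne]
    have hmM : min (pvRootp parent a) (pvRootp parent b)
        < max (pvRootp parent a) (pvRootp parent b) := by omega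
    have hMlen : max (pvRootp parent a) (pvRootp parent b) < parent.length := by omega
    have hMr : parent.getD (max (pvRootp parent a) (pvRootp parent b))
        (max (pvRootp parent a) (pvRootp parent b))
        = max (pvRootp parent a) (pvRootp parent b) := by
      rcases Nat.le_total (pvRootp parent a) (pvRootp parent b) with h | h
      · rw [Nat.max_eq_right h]; exact hM_root b
      · rw [Nat.max_eq_left h]; exact hM_root a
    have hmr : parent.getD (min (pvRootp parent a) (pvRootp parent b))
        (min (pvRootp parent a) (pvRootp parent b))
        = min (pvRootp parent a) (pvRootp parent b) := by
      rcases Nat.le_total (pvRootp parent a) (pvRootp parent b) with h | h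
      · rw [Nat.min_eq_left h]; exact hM_root a
      · rw [Nat.min_eq_right h]; exact hM_root b
    have hroot' := pvRootp_set parent h1 hmM hMlen hMr hmr
    have h1' : pvUF1 (ufUnion n parent a b) := by
      rw [hset]; exact pvUF1_set h1 hmM hMlen
    have hlen' : (ufUnion n parent a b).length = n := by
      rw [hset, List.length_set, hlen]
    have hra_sym : Relation.ReflTransGen S (pvRootp parent a) a :=
      (Relation.ReflTransGen.symmetric hSsym) (hinv a).1
    have hrb_sym : Relation.ReflTransGen S (pvRootp parent b) b :=
      (Relation.ReflTransGen.symmetric hSsym) (hinv b).1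
    have hMm : Relation.ReflTransGen (fun u v => S u v ∨ (u = a ∧ v = b) ∨ (u = b ∧ v = a))
        (max (pvRootp parent a) (pvRootp parent b))
        (min (pvRootp parent a) (pvRootp parent b)) := by
      have e1 : Relation.ReflTransGen
          (fun u v => S u v ∨ (u = a ∧ v = b) ∨ (u = b ∧ v = a)) a b :=
        Relation.ReflTransGen.single (Or.inr (Or.inl ⟨rfl, rfl⟩))
      have e2 : Relation.ReflTransGen
          (fun u v => S u v ∨ (u = a ∧ v = b) ∨ (u = b ∧ v = a)) b a :=
        Relation.ReflTransGen.single (Or.inr (Or.inr ⟨rfl, rfl⟩))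
      rcases Nat.le_total (pvRootp parent a) (pvRootp parent b) with h | h
      · rw [Nat.max_eq_right h, Nat.min_eq_left h]
        exact ((hembed hrb_sym).trans e2).trans (hembed (hinv a).1)
      · rw [Nat.max_eq_left h, Nat.min_eq_right h]
        exact ((hembed hra_sym).trans e1).trans (hembed (hinv b).1)
    refine ⟨hlen', h1', fun i => ?_⟩
    have hri : pvRootp (ufUnion n parent a b) i
        = if pvRootp parent i = max (pvRootp parent a) (pvRootp parent b)
          then min (pvRootp parent a) (pvRootp parent b) else pvRootp parent i := by
      rw [hset]; exact hroot' i
    constructor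
    · by_cases hc : pvRootp parent i = max (pvRootp parent a) (pvRootp parent b)
      · rw [hri, if_pos hc]
        have hiM : Relation.ReflTransGen
            (fun u v => S u v ∨ (u = a ∧ v = b) ∨ (u = b ∧ v = a)) i
            (max (pvRootp parent a) (pvRootp parent b)) := by
          rw [← hc]; exact hembed (hinv i).1
        exact hiM.trans hMm
      · rw [hri, if_neg hc]; exact hembed (hinv i).1
    · intro j hj
      rcases (pvRTG_ext a b i j).mp hj with h2 | ⟨h2, h3⟩ | ⟨h2, h3⟩
      · have hij := (hinv i).2 j h2
        rw [hri]; split_ifs with hc <;> omega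
      · have heq := pvRoot_eq_of_rel hSsym parent hinv h2
        have hj3 := (hinv b).2 j h3
        rw [hri]; split_ifs with hc <;> omega
      · have heq := pvRoot_eq_of_rel hSsym parent hinv h2
        have hj3 := (hinv a).2 j h3
        rw [hri]; split_ifs with hc <;> omega


-- ===== B's first pass establishes: every root is its component's minimum =====

theorem pvRange_getD (n x : Nat) : (List.range n).getD x x = x := by
  rcases Nat.lt_or_ge x n with h | h
  · rw [List.getD_eq_getElem _ _ (by simpa using h)]
    simp
  · rw [List.getD_eq_default]
    simpa using h

theorem pvInv_transfer {S S' : Nat → Nat → Prop} (h : ∀ x y, S x y ↔ S' x y)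
    (parent : List Nat)
    (hinv : ∀ i, Relation.ReflTransGen S i (pvRootp parent i) ∧
      ∀ j, Relation.ReflTransGen S i j → pvRootp parent i ≤ j) :
    ∀ i, Relation.ReflTransGen S' i (pvRootp parent i) ∧
      ∀ j, Relation.ReflTransGen S' i j → pvRootp parent i ≤ j := by
  intro i
  exact ⟨(pvRTG_congr h _ _).mp (hinv i).1,
    fun j hj => (hinv i).2 j ((pvRTG_congr h _ _).mpr hj)⟩

set_option maxHeartbeats 1000000 in
theorem pvSEk_succ_iff (matrix : List (List Bool)) (R C k : Nat) :
    ∀ u v, pvSEk matrix R C (k + 1) u v ↔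
      (pvSEk matrix R C k u v
        ∨ (((u = k ∧ v = k - C) ∨ (u = k - C ∧ v = k)) ∧
            (pvGoodN matrix R C k = true ∧ C ≤ k ∧ pvGoodN matrix R C (k - C) = true))
        ∨ (((u = k ∧ v = k - 1) ∨ (u = k - 1 ∧ v = k)) ∧
            (pvGoodN matrix R C k = true ∧ k % C ≠ 0 ∧ pvGoodN matrix R C (k - 1) = true))) := by
  intro u v
  have hEk : ∀ a b, pvEk matrix R C (k + 1) a b ↔
      (pvEk matrix R C k a b
        ∨ (a = k ∧ b = k - C ∧ pvGoodN matrix R C k = true ∧ C ≤ k ∧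
            pvGoodN matrix R C (k - C) = true)
        ∨ (a = k ∧ b = k - 1 ∧ pvGoodN matrix R C k = true ∧ k % C ≠ 0 ∧
            pvGoodN matrix R C (k - 1) = true)) := by
    intro a b
    unfold pvEk pvUpE pvLeftE
    constructor
    · rintro ⟨hlt, h | h⟩
      · rcases Nat.lt_or_ge a k with h' | h'
        · exact Or.inl ⟨h', Or.inl h⟩
        · have hak : a = k := by omega
          subst hak
          have hb : b = a - C := by omega
          subst hb
          exact Or.inr (Or.inl ⟨rfl, rfl, h.1, h.2.2.1, h.2.1⟩)
      · rcases Nat.lt_or_ge a k with h' | h'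
        · exact Or.inl ⟨h', Or.inr h⟩
        · have hak : a = k := by omega
          subst hak
          have hb : b = a - 1 := by omega
          subst hb
          exact Or.inr (Or.inr ⟨rfl, rfl, h.1, h.2.2.1, h.2.1⟩)
    · rintro (⟨hlt, h⟩ | ⟨rfl, rfl, hg, hc, hgb⟩ | ⟨rfl, rfl, hg, hc, hgb⟩)
      · exact ⟨by omega, h⟩
      · exact ⟨by omega, Or.inl ⟨hg, hgb, hc, by omega⟩⟩
      · have hk1 : 1 ≤ a := by
          rcases Nat.eq_zero_or_pos a with rfl | h'
          · simp at hc
          · exact h'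
        exact ⟨by omega, Or.inr ⟨hg, hgb, hc, by omega⟩⟩
  unfold pvSEk
  rw [hEk, hEk]
  tauto

theorem pvRk_succ_inv (matrix : List (List Bool)) (R C k : Nat) (hk : k < R * C)
    (parent : List Nat) (hlen : parent.length = R * C) (h1 : pvUF1 parent)
    (hinv : ∀ i, pvRk matrix R C k i (pvRootp parent i) ∧
      ∀ j, pvRk matrix R C k i j → pvRootp parent i ≤ j) :
    (ufStep matrix R C parent k).length = R * C ∧ pvUF1 (ufStep matrix R C parent k) ∧
      ∀ i, pvRk matrix R C (k + 1) i (pvRootp (ufStep matrix R C parent k) i) ∧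
        ∀ j, pvRk matrix R C (k + 1) i j → pvRootp (ufStep matrix R C parent k) i ≤ j := by
  have hC : 0 < C := by
    rcases Nat.eq_zero_or_pos C with rfl | h'
    · simp at hk
    · exact h'
  have hcellk := pvGoodN_cell (matrix := matrix) hk
  by_cases hg : pvGoodN matrix R C k = true
  · -- good cell: up to two unions
    have hcond : pvCell matrix ((k / C : Nat) : Int) ((k % C : Nat) : Int) = true := by
      rw [← hcellk]; exact hg
    -- guard equivalences
    have hupg : (decide (0 < k / C) &&
        pvCell matrix ((k / C - 1 : Nat) : Int) ((k % C : Nat) : Int)) = true ↔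
        (C ≤ k ∧ pvGoodN matrix R C (k - C) = true) := by
      rcases Nat.lt_or_ge k C with h' | h'
      · have hd : k / C = 0 := Nat.div_eq_of_lt h'
        simp [hd]
        omega
      · have hd : 0 < k / C := Nat.div_pos h' hC
        have hkC : k - C < R * C := by omega
        have e1 : (k - C) / C = k / C - 1 ∧ (k - C) % C = k % C := by
          have hd1 : 1 ≤ k / C := hd
          have e0 : k - C = (k / C - 1) * C + k % C := by
            have h2 := Nat.div_add_mod k C
            have e2 : (k / C - 1) * C + C = (k / C) * C := by
              obtain ⟨d, hd'⟩ := Nat.exists_eq_add_of_le hd1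
              rw [hd']
              have hdd : 1 + d - 1 = d := by omega
              rw [hdd]
              ring
            have e3 : (k / C) * C = C * (k / C) := by ring
            omega
          rw [e0]
          exact pvFlat_divmod (Nat.mod_lt _ hC)
        rw [pvGoodN_cell hkC, e1.1, e1.2]
        simp [hd, h']
    have hleftg : (decide (0 < k % C) &&
        pvCell matrix ((k / C : Nat) : Int) ((k % C - 1 : Nat) : Int)) = true ↔
        (k % C ≠ 0 ∧ pvGoodN matrix R C (k - 1) = true) := by
      rcases Nat.eq_zero_or_pos (k % C) with h' | h'
      · simp [h']
      · have hk1 : 0 < k := by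
          rcases Nat.eq_zero_or_pos k with rfl | h2
          · simp at h'
          · exact h2
        have hkm : k - 1 < R * C := by omega
        have e1 : (k - 1) / C = k / C ∧ (k - 1) % C = k % C - 1 := by
          have e0 : k - 1 = (k / C) * C + (k % C - 1) := by
            have h2 := Nat.div_add_mod k C
            have e2 : C * (k / C) = (k / C) * C := by ring
            omega
          rw [e0]
          exact pvFlat_divmod (by have := Nat.mod_lt k hC; omega)
        rw [pvGoodN_cell hkm, e1.1, e1.2]
        simp [h']
        omega
    -- unfold the step
    have hstep : ufStep matrix R C parent k
        = (if decide (0 < k % C) &&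
              pvCell matrix ((k / C : Nat) : Int) ((k % C - 1 : Nat) : Int) then
            ufUnion (R * C)
              (if decide (0 < k / C) &&
                  pvCell matrix ((k / C - 1 : Nat) : Int) ((k % C : Nat) : Int) then
                ufUnion (R * C) parent k (k - C)
              else parent) k (k - 1)
          else
            (if decide (0 < k / C) &&
                pvCell matrix ((k / C - 1 : Nat) : Int) ((k % C : Nat) : Int) then
              ufUnion (R * C) parent k (k - C)
            else parent)) := by
      unfold ufStep
      rw [if_pos hcond]
    by_cases hup : (decide (0 < k / C) &&
        pvCell matrix ((k / C - 1 : Nat) : Int) ((k % C : Nat) : Int)) = true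
    · obtain ⟨hcle, hgup⟩ := hupg.mp hup
      -- up union
      have hu := pvUnion_lemma (R * C) (pvSEk matrix R C k) (pvSEk_symm matrix R C k)
        parent hlen h1 hinv k (k - C) hk (by omega)
      obtain ⟨hlen1, h11, hinv1⟩ := hu
      by_cases hleft : (decide (0 < k % C) &&
          pvCell matrix ((k / C : Nat) : Int) ((k % C - 1 : Nat) : Int)) = true
      · obtain ⟨hmne, hgl⟩ := hleftg.mp hleft
        have hl := pvUnion_lemma (R * C)
          (fun u v => pvSEk matrix R C k u v ∨ (u = k ∧ v = k - C) ∨ (u = k - C ∧ v = k))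
          (by
            intro u v h
            rcases h with h | ⟨h1', h2'⟩ | ⟨h1', h2'⟩
            · exact Or.inl (pvSEk_symm matrix R C k h)
            · exact Or.inr (Or.inr ⟨h2', h1'⟩)
            · exact Or.inr (Or.inl ⟨h2', h1'⟩))
          _ hlen1 h11 hinv1 k (k - 1) hk (by omega)
        obtain ⟨hlen2, h12, hinv2⟩ := hl
        rw [hstep, if_pos hleft, if_pos hup]
        refine ⟨hlen2, h12, ?_⟩
        apply pvInv_transfer (fun x y => ?_) _ hinv2
        rw [pvSEk_succ_iff]
        constructor
        · rintro ((h | ⟨h1', h2'⟩ | ⟨h1', h2'⟩) | ⟨h1', h2'⟩ | ⟨h1', h2'⟩)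
          · exact Or.inl h
          · exact Or.inr (Or.inl ⟨Or.inl ⟨h1', h2'⟩, hg, hcle, hgup⟩)
          · exact Or.inr (Or.inl ⟨Or.inr ⟨h1', h2'⟩, hg, hcle, hgup⟩)
          · exact Or.inr (Or.inr ⟨Or.inl ⟨h1', h2'⟩, hg, hmne, hgl⟩)
          · exact Or.inr (Or.inr ⟨Or.inr ⟨h1', h2'⟩, hg, hmne, hgl⟩)
        · rintro (h | ⟨(⟨h1', h2'⟩ | ⟨h1', h2'⟩), _⟩ | ⟨(⟨h1', h2'⟩ | ⟨h1', h2'⟩), _⟩)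
          · exact Or.inl (Or.inl h)
          · exact Or.inl (Or.inr (Or.inl ⟨h1', h2'⟩))
          · exact Or.inl (Or.inr (Or.inr ⟨h1', h2'⟩))
          · exact Or.inr (Or.inl ⟨h1', h2'⟩)
          · exact Or.inr (Or.inr ⟨h1', h2'⟩)
      · rw [hstep, if_neg hleft, if_pos hup]
        refine ⟨hlen1, h11, ?_⟩
        apply pvInv_transfer (fun x y => ?_) _ hinv1
        rw [pvSEk_succ_iff]
        have hnl : ¬ (k % C ≠ 0 ∧ pvGoodN matrix R C (k - 1) = true) := by
          intro hc
          exact hleft (hleftg.mpr hc)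
        constructor
        · rintro (h | ⟨h1', h2'⟩ | ⟨h1', h2'⟩)
          · exact Or.inl h
          · exact Or.inr (Or.inl ⟨Or.inl ⟨h1', h2'⟩, hg, hcle, hgup⟩)
          · exact Or.inr (Or.inl ⟨Or.inr ⟨h1', h2'⟩, hg, hcle, hgup⟩)
        · rintro (h | ⟨(⟨h1', h2'⟩ | ⟨h1', h2'⟩), _⟩ | ⟨_, _, h2', h3'⟩)
          · exact Or.inl h
          · exact Or.inr (Or.inl ⟨h1', h2'⟩)
          · exact Or.inr (Or.inr ⟨h1', h2'⟩)
          · exact absurd ⟨h2', h3'⟩ hnl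
    · have hnu : ¬ (C ≤ k ∧ pvGoodN matrix R C (k - C) = true) := by
        intro hc
        exact hup (hupg.mpr hc)
      by_cases hleft : (decide (0 < k % C) &&
          pvCell matrix ((k / C : Nat) : Int) ((k % C - 1 : Nat) : Int)) = true
      · obtain ⟨hmne, hgl⟩ := hleftg.mp hleft
        have hl := pvUnion_lemma (R * C) (pvSEk matrix R C k) (pvSEk_symm matrix R C k)
          parent hlen h1 hinv k (k - 1) hk (by omega)
        obtain ⟨hlen2, h12, hinv2⟩ := hl
        rw [hstep, if_pos hleft, if_neg hup]
        refine ⟨hlen2, h12, ?_⟩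
        apply pvInv_transfer (fun x y => ?_) _ hinv2
        rw [pvSEk_succ_iff]
        constructor
        · rintro (h | ⟨h1', h2'⟩ | ⟨h1', h2'⟩)
          · exact Or.inl h
          · exact Or.inr (Or.inr ⟨Or.inl ⟨h1', h2'⟩, hg, hmne, hgl⟩)
          · exact Or.inr (Or.inr ⟨Or.inr ⟨h1', h2'⟩, hg, hmne, hgl⟩)
        · rintro (h | ⟨_, _, h2', h3'⟩ | ⟨(⟨h1', h2'⟩ | ⟨h1', h2'⟩), _⟩)
          · exact Or.inl h
          · exact absurd ⟨h2', h3'⟩ hnu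
          · exact Or.inr (Or.inl ⟨h1', h2'⟩)
          · exact Or.inr (Or.inr ⟨h1', h2'⟩)
      · have hnl : ¬ (k % C ≠ 0 ∧ pvGoodN matrix R C (k - 1) = true) := by
          intro hc
          exact hleft (hleftg.mpr hc)
        rw [hstep, if_neg hleft, if_neg hup]
        refine ⟨hlen, h1, ?_⟩
        apply pvInv_transfer (fun x y => ?_) _ hinv
        rw [pvSEk_succ_iff]
        constructor
        · exact fun h => Or.inl h
        · rintro (h | ⟨_, _, h2', h3'⟩ | ⟨_, _, h2', h3'⟩)
          · exact h
          · exact absurd ⟨h2', h3'⟩ hnu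
          · exact absurd ⟨h2', h3'⟩ hnl
  · -- not good: no change, no new edges
    have hgf : pvGoodN matrix R C k = false := by
      cases hgb : pvGoodN matrix R C k
      · rfl
      · exact absurd hgb hg
    have hcond : pvCell matrix ((k / C : Nat) : Int) ((k % C : Nat) : Int) = false := by
      rw [← hcellk]
      exact hgf
    have hstep : ufStep matrix R C parent k = parent := by
      unfold ufStep
      rw [if_neg (by rw [hcond]; simp)]
    rw [hstep]
    refine ⟨hlen, h1, ?_⟩
    apply pvInv_transfer (fun x y => ?_) _ hinv
    rw [pvSEk_succ_iff]
    have hg' : pvGoodN matrix R C k ≠ true := by simpa using hg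
    constructor
    · exact fun h => Or.inl h
    · rintro (h | ⟨_, h1', _⟩ | ⟨_, h1', _⟩)
      · exact h
      · exact absurd h1' hg'
      · exact absurd h1' hg'

theorem pvParentF_inv (matrix : List (List Bool)) (R C : Nat) :
    (pvParentF matrix R C).length = R * C ∧ pvUF1 (pvParentF matrix R C) ∧
      ∀ i, pvRk matrix R C (R * C) i (pvRootp (pvParentF matrix R C) i) ∧
        ∀ j, pvRk matrix R C (R * C) i j → pvRootp (pvParentF matrix R C) i ≤ j := by
  have main : ∀ k, k ≤ R * C →
      ((List.range k).foldl (ufStep matrix R C) (List.range (R * C))).length = R * C ∧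
      pvUF1 ((List.range k).foldl (ufStep matrix R C) (List.range (R * C))) ∧
      ∀ i, pvRk matrix R C k i
            (pvRootp ((List.range k).foldl (ufStep matrix R C) (List.range (R * C))) i) ∧
        ∀ j, pvRk matrix R C k i j →
          pvRootp ((List.range k).foldl (ufStep matrix R C) (List.range (R * C))) i ≤ j := by
    intro k
    induction k with
    | zero =>
      intro _
      simp only [List.range_zero, List.foldl_nil]
      refine ⟨by simp, fun x => by rw [pvRange_getD], ?_⟩
      intro i
      have hroot : pvRootp (List.range (R * C)) i = i :=
        pvRootp_of_root _ (pvRange_getD _ _)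
      rw [hroot]
      exact ⟨Relation.ReflTransGen.refl,
        fun j hj => le_of_eq ((pvRk_zero matrix R C i j).mp hj)⟩
    | succ k ih =>
      intro hk1
      obtain ⟨hlen, h1, hinv⟩ := ih (by omega)
      have := pvRk_succ_inv matrix R C k (by omega) _ hlen h1 hinv
      rwa [List.range_succ, List.foldl_append, List.foldl_cons, List.foldl_nil]
  exact main (R * C) (le_refl _)

-- The processed edges generate exactly 4-neighbour connectivity of truthy cells.
theorem pvRk_top (matrix : List (List Bool)) (R C : Nat) (x y : Nat) :
    pvRk matrix R C (R * C) x y ↔ pvNConn matrix R C x y := by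
  constructor
  · intro h
    refine h.mono (fun u v hs => ?_)
    have hone : ∀ a b, pvEk matrix R C (R * C) a b → pvNAdj matrix R C a b := by
      intro a b hab
      obtain ⟨hlt, hud⟩ := hab
      rcases hud with ⟨hga, hgb, hca, hba⟩ | ⟨hga, hgb, hca, hba⟩
      · -- up edge: b + C = a
        have hC : 0 < C := by
          have := pvGoodN_lt hga
          rcases Nat.eq_zero_or_pos C with rfl | h' 
          · simp at this
          · exact h'
        have hd1 : 1 ≤ a / C := Nat.div_pos hca hC
        have e0 : b = (a / C - 1) * C + a % C := by
          have h2 := Nat.div_add_mod a C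
          have e2 : (a / C - 1) * C + C = (a / C) * C := by
            obtain ⟨d, hd'⟩ := Nat.exists_eq_add_of_le hd1
            rw [hd']
            have hdd : 1 + d - 1 = d := by omega
            rw [hdd]
            ring
          have e3 : (a / C) * C = C * (a / C) := by ring
          omega
        obtain ⟨ed, em⟩ := pvFlat_divmod (C := C) (a := a / C - 1) (Nat.mod_lt _ hC)
        rw [← e0] at ed em
        refine ⟨hga, hgb, ?_⟩
        simp only [pvToP, pvNbrs, List.mem_cons, List.not_mem_nil, or_false]
        refine Or.inl (Prod.ext_iff.mpr ⟨?_, by rw [em]⟩)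
        rw [ed]
        have : ((a / C - 1 : Nat) : Int) = ((a / C : Nat) : Int) - 1 := by omega
        simpa using this
      · -- left edge: b + 1 = a
        have hC : 0 < C := by
          have hlt' := pvGoodN_lt hga
          rcases Nat.eq_zero_or_pos C with rfl | h'
          · simp at hlt'
          · exact h'
        have e0 : b = (a / C) * C + (a % C - 1) := by
          have h2 := Nat.div_add_mod a C
          have e2 : C * (a / C) = (a / C) * C := by ring
          omega
        obtain ⟨ed, em⟩ := pvFlat_divmod (C := C) (a := a / C) (b := a % C - 1)
          (by have := Nat.mod_lt a hC; omega)
        rw [← e0] at ed em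
        refine ⟨hga, hgb, ?_⟩
        simp only [pvToP, pvNbrs, List.mem_cons, List.not_mem_nil, or_false]
        refine Or.inr (Or.inr (Or.inl (Prod.ext_iff.mpr ⟨by rw [ed], ?_⟩)))
        rw [em]
        have : ((a % C - 1 : Nat) : Int) = ((a % C : Nat) : Int) - 1 := by omega
        simpa using this
    rcases hs with h' | h'
    · exact hone _ _ h'
    · exact pvNAdj_symm matrix R C (hone _ _ h')
  · intro h
    refine h.mono (fun u v hadj => ?_)
    obtain ⟨hgu, hgv, hnb⟩ := hadj
    have hun := pvGoodN_lt hgu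
    have hvn := pvGoodN_lt hgv
    have hC : 0 < C := by
      rcases Nat.eq_zero_or_pos C with rfl | h' 
      · simp at hun
      · exact h'
    have hqu := Nat.div_add_mod u C
    have hqv := Nat.div_add_mod v C
    have hmu : u % C < C := Nat.mod_lt _ hC
    have hmv : v % C < C := Nat.mod_lt _ hC
    simp only [pvToP, pvNbrs, List.mem_cons, List.not_mem_nil, or_false,
      Prod.mk.injEq] at hnb
    rcases hnb with ⟨e1, e2⟩ | ⟨e1, e2⟩ | ⟨e1, e2⟩ | ⟨e1, e2⟩
    · -- v is up of u: v/C = u/C - 1, v%C = u%C  ⇒  v + C = u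
      have e1' : (v / C) + 1 = u / C := by omega
      have e2' : v % C = u % C := by exact_mod_cast e2
      have hmul : C * (u / C) = C * (v / C) + C := by
        rw [← e1']
        ring
      have huv : v + C = u := by
        set t := C * (v / C) with ht
        omega
      exact Or.inl ⟨hun, Or.inl ⟨hgu, hgv, by omega, huv⟩⟩
    · -- v is down of u: u is up of v
      have e1' : (u / C) + 1 = v / C := by omega
      have e2' : v % C = u % C := by exact_mod_cast e2
      have hmul : C * (v / C) = C * (u / C) + C := by
        rw [← e1']
        ring
      have huv : u + C = v := by
        set t := C * (u / C) with ht
        omega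
      exact Or.inr ⟨hvn, Or.inl ⟨hgv, hgu, by omega, huv⟩⟩
    · -- v is left of u: v + 1 = u, u % C ≠ 0
      have e1' : v / C = u / C := by exact_mod_cast e1
      have e2' : (v % C) + 1 = u % C := by omega
      have hmul : C * (v / C) = C * (u / C) := by rw [e1']
      have huv : v + 1 = u := by
        set t := C * (u / C) with ht
        omega
      exact Or.inl ⟨hun, Or.inr ⟨hgu, hgv, by omega, huv⟩⟩
    · -- v is right of u: u + 1 = v, v % C ≠ 0
      have e1' : v / C = u / C := by exact_mod_cast e1
      have e2' : (u % C) + 1 = v % C := by omega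
      have hmul : C * (v / C) = C * (u / C) := by rw [e1']
      have huv : u + 1 = v := by
        set t := C * (u / C) with ht
        omega
      exact Or.inr ⟨hvn, Or.inr ⟨hgv, hgu, by omega, huv⟩⟩

-- Fundamental theorem of B's first pass.
theorem pvFT (matrix : List (List Bool)) (R C : Nat) :
    ∀ i, i < R * C →
      pvRootF matrix R C i = pvRootp (pvParentF matrix R C) i ∧
      pvNConn matrix R C i (pvRootF matrix R C i) ∧
      ∀ j, pvNConn matrix R C i j → pvRootF matrix R C i ≤ j := by
  obtain ⟨hlen, h1, hinv⟩ := pvParentF_inv matrix R C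
  intro i hi
  have hfe : pvRootF matrix R C i = pvRootp (pvParentF matrix R C) i :=
    pvUfFind_eq _ h1 i (R * C + 1) (by omega)
  refine ⟨hfe, ?_, ?_⟩
  · rw [hfe]
    exact (pvRk_top matrix R C _ _).mp (hinv i).1
  · intro j hj
    rw [hfe]
    exact (hinv i).2 j ((pvRk_top matrix R C _ _).mpr hj)


-- ===== Corollaries of the first-pass theorem =====

theorem pvRootF_good {matrix : List (List Bool)} {R C i : Nat}
    (hg : pvGoodN matrix R C i = true) :
    pvGoodN matrix R C (pvRootF matrix R C i) = true :=
  pvNConn_good hg (pvFT matrix R C i (pvGoodN_lt hg)).2.1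

theorem pvRootF_le {matrix : List (List Bool)} {R C i : Nat}
    (hg : pvGoodN matrix R C i = true) : pvRootF matrix R C i ≤ i :=
  (pvFT matrix R C i (pvGoodN_lt hg)).2.2 i Relation.ReflTransGen.refl

theorem pvRootF_eq_of_conn {matrix : List (List Bool)} {R C i j : Nat}
    (hgi : pvGoodN matrix R C i = true) (h : pvNConn matrix R C i j) :
    pvRootF matrix R C i = pvRootF matrix R C j := by
  have hgj : pvGoodN matrix R C j = true := pvNConn_good hgi h
  have hji : pvNConn matrix R C j i := pvNConn_symm matrix R C h
  have h1 : pvRootF matrix R C i ≤ pvRootF matrix R C j :=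
    (pvFT matrix R C i (pvGoodN_lt hgi)).2.2 _
      (h.trans (pvFT matrix R C j (pvGoodN_lt hgj)).2.1)
  have h2 : pvRootF matrix R C j ≤ pvRootF matrix R C i :=
    (pvFT matrix R C j (pvGoodN_lt hgj)).2.2 _
      (hji.trans (pvFT matrix R C i (pvGoodN_lt hgi)).2.1)
  omega

-- m is its own root iff no earlier (row-major) truthy cell is connected to it.
theorem pvSeed_iff' {matrix : List (List Bool)} {R C m : Nat}
    (hg : pvGoodN matrix R C m = true) :
    pvRootF matrix R C m = m ↔
      ¬ ∃ j, j < m ∧ pvGoodN matrix R C j = true ∧ pvNConn matrix R C j m := by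
  constructor
  · rintro hr ⟨j, hj, hgj, hconn⟩
    have : pvRootF matrix R C m ≤ j :=
      (pvFT matrix R C m (pvGoodN_lt hg)).2.2 j (pvNConn_symm matrix R C hconn)
    omega
  · intro hno
    by_contra hne
    have hle : pvRootF matrix R C m < m :=
      lt_of_le_of_ne (pvRootF_le hg) hne
    exact hno ⟨pvRootF matrix R C m, hle, pvRootF_good hg,
      pvNConn_symm matrix R C (pvFT matrix R C m (pvGoodN_lt hg)).2.1⟩

-- ===== Component sets =====

theorem pvReach0_iff {matrix : List (List Bool)} {R C m : Nat}
    (hg : pvGoodN matrix R C m = true) (q : Int × Int) :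
    Relation.ReflTransGen (pvRel (pvGood matrix R C) ∅) (pvToP C m) q ↔
      ∃ j, q = pvToP C j ∧ pvNConn matrix R C m j := by
  constructor
  · intro h
    induction h with
    | refl => exact ⟨m, rfl, Relation.ReflTransGen.refl⟩
    | tail hxy hstep ih =>
      obtain ⟨j, rfl, hconn⟩ := ih
      obtain ⟨hmem, hgc, _⟩ := hstep
      obtain ⟨j', rfl, hgj'⟩ := pvPair_flat hgc
      exact ⟨j', rfl, hconn.tail ⟨pvNConn_good hg hconn, hgj', hmem⟩⟩
  · rintro ⟨j, rfl, hconn⟩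
    induction hconn with
    | refl => exact Relation.ReflTransGen.refl
    | tail hxy hadj ih =>
      exact ih.tail ⟨hadj.2.2, hadj.2.1, Finset.notMem_empty _⟩

theorem pvCompP_mem {matrix : List (List Bool)} {R C m : Nat}
    (hg : pvGoodN matrix R C m = true) (q : Int × Int) :
    q ∈ pvCompP matrix R C m ↔ ∃ j, q = pvToP C j ∧ pvNConn matrix R C m j := by
  have hW : ∀ p ∈ [pvToP C m], pvGood matrix R C p = true := by
    intro p hp
    simp only [List.mem_singleton] at hp
    subst hp
    exact hg
  have hfuel : ([pvToP C m] : List (Int × Int)).length + 5 * ((pvU R C \ ∅).card)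
      ≤ 5 * R * C + 5 := by
    rw [Finset.sdiff_empty, pvU_card]
    simp only [List.length_cons, List.length_nil]
    have h2 : 5 * (R * C) = 5 * R * C := by ring
    omega
  unfold pvCompP
  rw [pvRun_eq_closure (pvGood matrix R C) (pvMkA matrix R C) (pvU R C)
    (pvMkA_mem matrix R C) (pvMkA_len matrix R C) (fun _ h => pvGood_mem_U h)
    (5 * R * C + 5) ∅ [pvToP C m] hW hfuel q]
  constructor
  · rintro (h | ⟨s, hs, _, hpath⟩)
    · exact absurd h (Finset.notMem_empty _)
    · simp only [List.mem_singleton] at hs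
      subst hs
      exact (pvReach0_iff hg q).mp hpath
  · intro h
    exact Or.inr ⟨pvToP C m, by simp, Finset.notMem_empty _, (pvReach0_iff hg q).mpr h⟩

theorem pvCompP_inb {matrix : List (List Bool)} {R C m : Nat}
    (hg : pvGoodN matrix R C m = true) :
    ∀ p ∈ pvCompP matrix R C m, pvInb R C p := by
  intro p hp
  obtain ⟨j, rfl, hconn⟩ := (pvCompP_mem hg p).mp hp
  exact pvGood_inb (pvNConn_good hg hconn)

theorem pvGridOf_coh (R C : Nat) (S : Finset (Int × Int)) (hS : ∀ p ∈ S, pvInb R C p) :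
    pvCoh R C (pvGridOf R C S) S := by
  refine ⟨⟨by simp [pvGridOf], ?_⟩, hS, ?_⟩
  · intro row hr
    simp only [pvGridOf, List.mem_map, List.mem_range] at hr
    obtain ⟨r, _, rfl⟩ := hr
    simp
  · intro p hp
    obtain ⟨h1, h2, h3, h4⟩ := hp
    have hi : p.1.toNat < R := by omega
    have hj : p.2.toNat < C := by omega
    have hpp : p = ((p.1.toNat : Int), (p.2.toNat : Int)) :=
      Prod.ext_iff.mpr ⟨by omega, by omega⟩
    have hlen1 : p.1.toNat < (pvGridOf R C S).length := by
      simp only [pvGridOf, List.length_map, List.length_range]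
      exact hi
    have hrow : (pvGridOf R C S)[p.1.toNat]'hlen1
        = (List.range C).map (fun (c : Nat) =>
            decide (((p.1.toNat : Int), ((c : Nat) : Int)) ∈ S)) := by
      simp only [pvGridOf, List.getElem_map, List.getElem_range]
    have hlen2 : p.2.toNat < ((pvGridOf R C S)[p.1.toNat]'hlen1).length := by
      rw [hrow]
      simp only [List.length_map, List.length_range]
      exact hj
    have hcc : ((pvGridOf R C S)[p.1.toNat]'hlen1)[p.2.toNat]'hlen2
        = decide (((p.1.toNat : Int), (p.2.toNat : Int)) ∈ S) := by
      simp only [hrow, List.getElem_map, List.getElem_range]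
    rw [hpp, pvCell_nat _ hlen1 hlen2, hcc]

theorem pvSeeds_succ (matrix : List (List Bool)) (R C k : Nat) :
    pvSeeds matrix R C (k + 1) = pvSeeds matrix R C k ++
      (if pvGoodN matrix R C k && (pvRootF matrix R C k == k) then [k] else []) := by
  unfold pvSeeds
  rw [List.range_succ, List.filter_append]
  congr 1
  by_cases h : (pvGoodN matrix R C k && (pvRootF matrix R C k == k)) = true
  · simp [List.filter, h]
  · simp only [Bool.not_eq_true] at h
    simp [List.filter, h]

-- ===== A's fold computes the canonical region list =====

theorem pvA_fold (matrix : List (List Bool)) (R C : Nat) :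
    ∀ k, k ≤ R * C →
      ∃ V : Finset (Int × Int),
        pvCoh R C (((List.range k).foldl
          (fun acc i => pvStepA matrix R C acc (i / C, i % C)) (pvInit R C))).1 V ∧
        (∀ q, q ∈ V ↔ ∃ j, j < k ∧ pvGoodN matrix R C j = true ∧
            ∃ t, pvNConn matrix R C j t ∧ q = pvToP C t) ∧
        (((List.range k).foldl (fun acc i => pvStepA matrix R C acc (i / C, i % C))
          (pvInit R C))).2
          = (pvSeeds matrix R C k).map (fun m => pvGridOf R C (pvCompP matrix R C m)) := by
  intro k
  induction k with
  | zero =>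
    intro _
    refine ⟨∅, ?_, ?_, ?_⟩
    · simp only [List.range_zero, List.foldl_nil, pvInit]
      exact pvCoh_empty matrix R C
    · intro q
      simp
    · simp [pvSeeds, pvInit]
  | succ k ih =>
    intro hk1
    obtain ⟨V, hcoh, hmem, hout⟩ := ih (by omega)
    have hkn : k < R * C := by omega
    rw [List.range_succ, List.foldl_append, List.foldl_cons, List.foldl_nil]
    set acc := ((List.range k).foldl
      (fun acc i => pvStepA matrix R C acc (i / C, i % C)) (pvInit R C)) with hacc
    have htop : pvToP C k = (((k / C : Nat) : Int), ((k % C : Nat) : Int)) := rfl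
    by_cases hgood : pvGoodN matrix R C k = true
    · have hcellm : pvCell matrix ((k / C : Nat) : Int) ((k % C : Nat) : Int) = true := by
        rw [← pvGoodN_cell hkn]; exact hgood
      have hinbk : pvInb R C (pvToP C k) := pvGood_inb hgood
      by_cases hv : pvToP C k ∈ V
      · -- already visited: A skips, k is not a seed
        have hcellv : pvCell acc.1 ((k / C : Nat) : Int) ((k % C : Nat) : Int) = true := by
          have hc := hcoh.2.2 (pvToP C k) hinbk
          rw [htop] at hc
          dsimp only at hc
          rw [hc]
          exact decide_eq_true (htop ▸ hv)
        have hcondf : (pvCell matrix ((k / C : Nat) : Int) ((k % C : Nat) : Int)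
            && !pvCell acc.1 ((k / C : Nat) : Int) ((k % C : Nat) : Int)) = false := by
          rw [hcellv]
          simp
        have hstep : pvStepA matrix R C acc (k / C, k % C) = acc := by
          unfold pvStepA
          dsimp only
          rw [hcondf]
          simp
        rw [hstep]
        obtain ⟨j0, hj0, hgj0, t0, hconn0, hteq⟩ := hmem (pvToP C k) |>.mp hv
        have ht0 : t0 = k := pvToP_inj hteq.symm
        rw [ht0] at hconn0
        have hnoseed : ¬ (pvGoodN matrix R C k && (pvRootF matrix R C k == k)) = true := by
          simp only [Bool.and_eq_true, beq_iff_eq]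
          rintro ⟨_, hr⟩
          exact ((pvSeed_iff' hgood).mp hr) ⟨j0, hj0, hgj0, hconn0⟩
        refine ⟨V, hcoh, ?_, ?_⟩
        · intro q
          rw [hmem q]
          constructor
          · rintro ⟨j, hj, hgj, t, hconn, rfl⟩
            exact ⟨j, by omega, hgj, t, hconn, rfl⟩
          · rintro ⟨j, hj, hgj, t, hconn, rfl⟩
            rcases Nat.lt_or_ge j k with h' | h'
            · exact ⟨j, h', hgj, t, hconn, rfl⟩
            · have hj' : j = k := by omega
              subst hj'
              exact ⟨j0, hj0, hgj0, t, hconn0.trans hconn, rfl⟩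
        · rw [hout, pvSeeds_succ, if_neg hnoseed, List.append_nil]
      · -- new seed: A floods the component
        have hcellv : pvCell acc.1 ((k / C : Nat) : Int) ((k % C : Nat) : Int) = false := by
          have hc := hcoh.2.2 (pvToP C k) hinbk
          rw [htop] at hc
          dsimp only at hc
          rw [hc]
          exact decide_eq_false (htop ▸ hv)
        have hcond : (pvCell matrix ((k / C : Nat) : Int) ((k % C : Nat) : Int)
            && !pvCell acc.1 ((k / C : Nat) : Int) ((k % C : Nat) : Int)) = true := by
          rw [hcellm, hcellv]
          rfl
        have hstep : pvStepA matrix R C acc (k / C, k % C)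
            = ((pvDfsA matrix (R : Int) (C : Int) (5 * R * C + 5) [pvToP C k] acc.1
                  (List.replicate R (List.replicate C false))).1,
               acc.2 ++ [(pvDfsA matrix (R : Int) (C : Int) (5 * R * C + 5) [pvToP C k] acc.1
                  (List.replicate R (List.replicate C false))).2]) := by
          unfold pvStepA
          dsimp only
          rw [if_pos hcond]
          rfl
        have hWsing : ∀ p ∈ [pvToP C k], pvGood matrix R C p = true := by
          intro p hp
          simp only [List.mem_singleton] at hp
          subst hp
          exact hgood
        have hfuel : ([pvToP C k] : List (Int × Int)).length + 5 * ((pvU R C \ V).card)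
            ≤ 5 * R * C + 5 := by
          have h1 : (pvU R C \ V).card ≤ (pvU R C).card :=
            Finset.card_le_card Finset.sdiff_subset
          rw [pvU_card] at h1
          simp only [List.length_cons, List.length_nil]
          have h2 : 5 * (R * C) = 5 * R * C := by ring
          omega
        obtain ⟨hbr1, hbr2⟩ := pvDfsA_bridge matrix R C (5 * R * C + 5) [pvToP C k]
          acc.1 (List.replicate R (List.replicate C false)) V ∅ hcoh
          (pvCoh_empty matrix R C) hWsing hfuel
        set W := pvRun (pvMkA matrix R C) (5 * R * C + 5) V [pvToP C k] with hW
        -- reachability avoiding V = plain component reachability, for a fresh seed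
        have hstrength : ∀ t, pvNConn matrix R C k t →
            pvToP C t ∉ V ∧
              Relation.ReflTransGen (pvRel (pvGood matrix R C) V) (pvToP C k) (pvToP C t) := by
          intro t hconn
          induction hconn with
          | refl => exact ⟨hv, Relation.ReflTransGen.refl⟩
          | tail hxy hadj ih =>
            rename_i b c
            obtain ⟨hbV, hpath⟩ := ih
            have hcV : pvToP C c ∉ V := by
              intro hcV
              obtain ⟨j0, hj0, hgj0, t0, hconn0, hteq⟩ := (hmem (pvToP C c)).mp hcV
              have ht0 : t0 = c := pvToP_inj hteq.symm
              rw [ht0] at hconn0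
              have hkc : pvNConn matrix R C k c := hxy.tail hadj
              have : pvNConn matrix R C j0 k :=
                hconn0.trans (pvNConn_symm matrix R C hkc)
              exact hv ((hmem (pvToP C k)).mpr ⟨j0, hj0, hgj0, k, this, rfl⟩)
            exact ⟨hcV, hpath.tail ⟨hadj.2.2, hadj.2.1, hcV⟩⟩
        have hWmem : ∀ q, q ∈ W ↔ q ∈ V ∨ ∃ t, pvNConn matrix R C k t ∧ q = pvToP C t := by
          intro q
          rw [hW, pvRun_eq_closure (pvGood matrix R C) (pvMkA matrix R C) (pvU R C)
            (pvMkA_mem matrix R C) (pvMkA_len matrix R C) (fun _ h => pvGood_mem_U h)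
            (5 * R * C + 5) V [pvToP C k] hWsing hfuel q]
          constructor
          · rintro (h | ⟨s, hs, hsV, hpath⟩)
            · exact Or.inl h
            · simp only [List.mem_singleton] at hs
              subst hs
              have hpath0 : Relation.ReflTransGen (pvRel (pvGood matrix R C) ∅)
                  (pvToP C k) q :=
                hpath.mono (fun a b h => pvRel_mono _ (Finset.empty_subset V) h)
              obtain ⟨j, rfl, hconn⟩ := (pvReach0_iff hgood q).mp hpath0
              exact Or.inr ⟨j, hconn, rfl⟩
          · rintro (h | ⟨t, hconn, rfl⟩)
            · exact Or.inl h
            · exact Or.inr ⟨pvToP C k, by simp, hv, (hstrength t hconn).2⟩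
        have hWdiff : W \ V = pvCompP matrix R C k := by
          ext q
          simp only [Finset.mem_sdiff]
          rw [hWmem q, pvCompP_mem hgood q]
          constructor
          · rintro ⟨h | ⟨t, hconn, rfl⟩, hqV⟩
            · exact absurd h hqV
            · exact ⟨t, rfl, hconn⟩
          · rintro ⟨t, rfl, hconn⟩
            exact ⟨Or.inr ⟨t, hconn, rfl⟩, (hstrength t hconn).1⟩
        have hgrid : (pvDfsA matrix (R : Int) (C : Int) (5 * R * C + 5) [pvToP C k] acc.1
            (List.replicate R (List.replicate C false))).2
            = pvGridOf R C (pvCompP matrix R C k) := by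
          have hco : pvCoh R C
              (pvDfsA matrix (R : Int) (C : Int) (5 * R * C + 5) [pvToP C k] acc.1
                (List.replicate R (List.replicate C false))).2
              (pvCompP matrix R C k) := by
            have h2 := hbr2
            rw [Finset.empty_union, hWdiff] at h2
            exact h2
          exact pvCoh_ext hco (pvGridOf_coh R C _ (pvCompP_inb hgood))
        have hseed : (pvGoodN matrix R C k && (pvRootF matrix R C k == k)) = true := by
          simp only [Bool.and_eq_true, beq_iff_eq]
          refine ⟨hgood, (pvSeed_iff' hgood).mpr ?_⟩
          rintro ⟨j, hj, hgj, hconn⟩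
          exact hv ((hmem (pvToP C k)).mpr ⟨j, hj, hgj, k, hconn, rfl⟩)
        rw [hstep]
        refine ⟨W, hbr1, ?_, ?_⟩
        · intro q
          rw [hWmem q]
          constructor
          · rintro (h | ⟨t, hconn, rfl⟩)
            · obtain ⟨j, hj, hgj, t, hconn, rfl⟩ := (hmem q).mp h
              exact ⟨j, by omega, hgj, t, hconn, rfl⟩
            · exact ⟨k, by omega, hgood, t, hconn, rfl⟩
          · rintro ⟨j, hj, hgj, t, hconn, rfl⟩
            rcases Nat.lt_or_ge j k with h' | h'
            · exact Or.inl ((hmem _).mpr ⟨j, h', hgj, t, hconn, rfl⟩)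
            · have hj' : j = k := by omega
              subst hj'
              exact Or.inr ⟨t, hconn, rfl⟩
        · simp only []
          rw [hout, pvSeeds_succ, if_pos hseed, List.map_append, List.map_cons,
            List.map_nil, hgrid]
    · -- dead cell: nothing happens
      have hgf : pvGoodN matrix R C k = false := by
        cases hgb : pvGoodN matrix R C k
        · rfl
        · exact absurd hgb hgood
      have hcellm : pvCell matrix ((k / C : Nat) : Int) ((k % C : Nat) : Int) = false := by
        rw [← pvGoodN_cell hkn]; exact hgf
      have hcondf : (pvCell matrix ((k / C : Nat) : Int) ((k % C : Nat) : Int)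
          && !pvCell acc.1 ((k / C : Nat) : Int) ((k % C : Nat) : Int)) = false := by
        rw [hcellm]
        simp
      have hstep : pvStepA matrix R C acc (k / C, k % C) = acc := by
        unfold pvStepA
        dsimp only
        rw [hcondf]
        simp
      rw [hstep]
      refine ⟨V, hcoh, ?_, ?_⟩
      · intro q
        rw [hmem q]
        constructor
        · rintro ⟨j, hj, hgj, t, hconn, rfl⟩
          exact ⟨j, by omega, hgj, t, hconn, rfl⟩
        · rintro ⟨j, hj, hgj, t, hconn, rfl⟩
          rcases Nat.lt_or_ge j k with h' | h'
          · exact ⟨j, h', hgj, t, hconn, rfl⟩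
          · have hj' : j = k := by omega
            subst hj'
            exact absurd hgj (by rw [hgf]; simp)
      · rw [hout, pvSeeds_succ]
        rw [if_neg (by rw [hgf]; simp), List.append_nil]

theorem pvA_char (matrix : List (List Bool)) :
    find_regions_as_arrays matrix
      = (pvSeeds matrix matrix.length (matrix.headD []).length
          (matrix.length * (matrix.headD []).length)).map
        (fun m => pvGridOf matrix.length (matrix.headD []).length
          (pvCompP matrix matrix.length (matrix.headD []).length m)) := by
  rw [pvPortA_flat]
  obtain ⟨V, _, _, hout⟩ :=
    pvA_fold matrix matrix.length (matrix.headD []).length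
      (matrix.length * (matrix.headD []).length) (le_refl _)
  exact hout


-- ===== B's second pass computes the canonical region list =====

theorem pvRootF_idem {matrix : List (List Bool)} {R C i : Nat}
    (hg : pvGoodN matrix R C i = true) :
    pvRootF matrix R C (pvRootF matrix R C i) = pvRootF matrix R C i :=
  (pvRootF_eq_of_conn hg (pvFT matrix R C i (pvGoodN_lt hg)).2.1).symm

theorem pvSeeds_mem {matrix : List (List Bool)} {R C k m : Nat} :
    m ∈ pvSeeds matrix R C k ↔
      m < k ∧ pvGoodN matrix R C m = true ∧ pvRootF matrix R C m = m := by
  unfold pvSeeds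
  rw [List.mem_filter, List.mem_range]
  simp only [Bool.and_eq_true, beq_iff_eq]

theorem pvSeeds_nodup (matrix : List (List Bool)) (R C k : Nat) :
    (pvSeeds matrix R C k).Nodup :=
  (List.nodup_range).filter _

-- first-index lookup used to model the slot dict
def pvPos (l : List Nat) (x : Nat) : Option Nat :=
  match l with
  | [] => none
  | a :: t => if a = x then some 0 else (pvPos t x).map (· + 1)

theorem pvPos_snoc (l : List Nat) (b x : Nat) :
    pvPos (l ++ [b]) x
      = match pvPos l x with
        | some j => some j
        | none => if b = x then some l.length else none := by
  induction l with
  | nil => simp [pvPos]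
  | cons a t ih =>
    by_cases h : a = x
    · simp [pvPos, h]
    · simp only [List.cons_append, pvPos, h, if_false, ih, List.length_cons]
      cases pvPos t x with
      | some j => simp
      | none =>
        by_cases h2 : b = x <;> simp [h2]

theorem pvPos_isSome (l : List Nat) (x : Nat) :
    (pvPos l x).isSome = true ↔ x ∈ l := by
  induction l with
  | nil => simp [pvPos]
  | cons a t ih =>
    by_cases h : a = x
    · simp [pvPos, h]
    · have hne : x ≠ a := fun hc => h hc.symm
      simp [pvPos, h, ih, hne]

theorem pvPos_spec (l : List Nat) (x : Nat) :
    ∀ j, pvPos l x = some j → l[j]? = some x ∧ j < l.length := by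
  induction l with
  | nil => intro j h; simp [pvPos] at h
  | cons a t ih =>
    intro j h
    by_cases h2 : a = x
    · simp [pvPos, h2] at h
      subst h
      simp [h2]
    · simp only [pvPos, h2, if_false, Option.map_eq_some_iff] at h
      obtain ⟨j', hj', rfl⟩ := h
      obtain ⟨hg, hlt⟩ := ih j' hj'
      constructor
      · simpa using hg
      · simpa using hlt

def pvSk (matrix : List (List Bool)) (R C k m : Nat) : Finset (Int × Int) :=
  ((Finset.range (R * C)).filter
    (fun i => i < k ∧ pvGoodN matrix R C i = true ∧ pvRootF matrix R C i = m)).image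
    (fun i => pvToP C i)

theorem pvSk_mem {matrix : List (List Bool)} {R C k m : Nat} (q : Int × Int) :
    q ∈ pvSk matrix R C k m ↔
      ∃ i, i < k ∧ pvGoodN matrix R C i = true ∧ pvRootF matrix R C i = m ∧
        q = pvToP C i := by
  unfold pvSk
  simp only [Finset.mem_image, Finset.mem_filter, Finset.mem_range]
  constructor
  · rintro ⟨i, ⟨_, h1, h2, h3⟩, rfl⟩
    exact ⟨i, h1, h2, h3, rfl⟩
  · rintro ⟨i, h1, h2, h3, rfl⟩
    exact ⟨i, ⟨pvGoodN_lt h2, h1, h2, h3⟩, rfl⟩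

theorem pvSk_succ_skip {matrix : List (List Bool)} {R C k m : Nat}
    (hg : pvGoodN matrix R C k = false) :
    pvSk matrix R C (k + 1) m = pvSk matrix R C k m := by
  ext q
  rw [pvSk_mem, pvSk_mem]
  constructor
  · rintro ⟨i, h1, h2, h3, rfl⟩
    rcases Nat.lt_or_ge i k with h' | h'
    · exact ⟨i, h', h2, h3, rfl⟩
    · have : i = k := by omega
      subst this
      rw [hg] at h2
      exact absurd h2 (by simp)
  · rintro ⟨i, h1, h2, h3, rfl⟩
    exact ⟨i, by omega, h2, h3, rfl⟩

theorem pvSk_succ_other {matrix : List (List Bool)} {R C k m : Nat}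
    (hne : pvRootF matrix R C k ≠ m) :
    pvSk matrix R C (k + 1) m = pvSk matrix R C k m := by
  ext q
  rw [pvSk_mem, pvSk_mem]
  constructor
  · rintro ⟨i, h1, h2, h3, rfl⟩
    rcases Nat.lt_or_ge i k with h' | h'
    · exact ⟨i, h', h2, h3, rfl⟩
    · have : i = k := by omega
      subst this
      exact absurd h3 hne
  · rintro ⟨i, h1, h2, h3, rfl⟩
    exact ⟨i, by omega, h2, h3, rfl⟩

theorem pvSk_succ_hit {matrix : List (List Bool)} {R C k : Nat}
    (hg : pvGoodN matrix R C k = true) :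
    pvSk matrix R C (k + 1) (pvRootF matrix R C k)
      = insert (pvToP C k) (pvSk matrix R C k (pvRootF matrix R C k)) := by
  ext q
  rw [pvSk_mem, Finset.mem_insert, pvSk_mem]
  constructor
  · rintro ⟨i, h1, h2, h3, rfl⟩
    rcases Nat.lt_or_ge i k with h' | h'
    · exact Or.inr ⟨i, h', h2, h3, rfl⟩
    · have : i = k := by omega
      subst this
      exact Or.inl rfl
  · rintro (rfl | ⟨i, h1, h2, h3, rfl⟩)
    · exact ⟨k, by omega, hg, rfl, rfl⟩
    · exact ⟨i, by omega, h2, h3, rfl⟩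

theorem pvSk_self_empty {matrix : List (List Bool)} {R C k : Nat} :
    pvSk matrix R C k k = ∅ := by
  ext q
  rw [pvSk_mem]
  simp only [Finset.notMem_empty, iff_false]
  rintro ⟨i, h1, h2, h3, rfl⟩
  have : k ≤ i := h3 ▸ pvRootF_le h2
  omega

theorem pvSk_eq_comp {matrix : List (List Bool)} {R C m : Nat}
    (hg : pvGoodN matrix R C m = true) (hr : pvRootF matrix R C m = m) :
    pvSk matrix R C (R * C) m = pvCompP matrix R C m := by
  ext q
  rw [pvSk_mem, pvCompP_mem hg]
  constructor
  · rintro ⟨i, _, hgi, hri, rfl⟩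
    refine ⟨i, rfl, ?_⟩
    have := (pvFT matrix R C i (pvGoodN_lt hgi)).2.1
    rw [hri] at this
    exact pvNConn_symm matrix R C this
  · rintro ⟨i, rfl, hconn⟩
    have hgi : pvGoodN matrix R C i = true := pvNConn_good hg hconn
    have : pvRootF matrix R C i = m := by
      rw [← (pvRootF_eq_of_conn hg hconn), hr]
    exact ⟨i, pvGoodN_lt hgi, hgi, this, rfl⟩

theorem pvSet_snoc {α : Type} (xs : List α) (e v : α) :
    (xs ++ [e]).set xs.length v = xs ++ [v] := by
  induction xs with
  | nil => simp
  | cons a t ih => simp [ih]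

-- B's second-pass fold body (identical to the lambda in ufCollect).
def pvStepB (matrix : List (List Bool)) (R C : Nat) (parent : List Nat)
    (acc : List (List (List Bool)) × PySem.Dict Nat Nat) (i : Nat) :
    List (List (List Bool)) × PySem.Dict Nat Nat :=
  if pvCell matrix ((i / C : Nat) : Int) ((i % C : Nat) : Int) then
    let acc1 : List (List (List Bool)) × PySem.Dict Nat Nat :=
      if acc.2.contains (ufFind parent (R * C + 1) i) then acc
      else (acc.1 ++ [List.replicate R (List.replicate C false)],
            acc.2.insert (ufFind parent (R * C + 1) i) acc.1.length)
    (acc1.1.set (acc1.2.getD (ufFind parent (R * C + 1) i) 0)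
       (pvMark (acc1.1.getD (acc1.2.getD (ufFind parent (R * C + 1) i) 0) [])
         ((i / C : Nat) : Int) ((i % C : Nat) : Int)),
     acc1.2)
  else acc

theorem pvCollect_eq (matrix : List (List Bool)) (R C : Nat) (parent : List Nat) :
    ufCollect matrix R C parent
      = ((List.range (R * C)).foldl (pvStepB matrix R C parent)
          ([], PySem.Dict.empty)).1 := rfl

theorem pvB_fold (matrix : List (List Bool)) (R C : Nat) :
    ∀ k, k ≤ R * C →
      (∀ x, (((List.range k).foldl (pvStepB matrix R C (pvParentF matrix R C))
          ([], PySem.Dict.empty))).2.get? x = pvPos (pvSeeds matrix R C k) x) ∧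
      (((List.range k).foldl (pvStepB matrix R C (pvParentF matrix R C))
          ([], PySem.Dict.empty))).1.length = (pvSeeds matrix R C k).length ∧
      ∀ j m, (pvSeeds matrix R C k)[j]? = some m →
        pvCoh R C ((((List.range k).foldl (pvStepB matrix R C (pvParentF matrix R C))
          ([], PySem.Dict.empty))).1.getD j []) (pvSk matrix R C k m) := by
  intro k
  induction k with
  | zero =>
    intro _
    refine ⟨?_, ?_, ?_⟩
    · intro x
      simp [PySem.Dict.get?_empty, pvSeeds, pvPos]
    · simp [pvSeeds]
    · intro j m hj
      simp [pvSeeds] at hj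
  | succ k ih =>
    intro hk1
    obtain ⟨hget, hlen, hcoh⟩ := ih (by omega)
    have hkn : k < R * C := by omega
    rw [List.range_succ, List.foldl_append, List.foldl_cons, List.foldl_nil]
    set st := ((List.range k).foldl (pvStepB matrix R C (pvParentF matrix R C))
      ([], PySem.Dict.empty)) with hst
    have hfind : ufFind (pvParentF matrix R C) (R * C + 1) k = pvRootF matrix R C k := rfl
    by_cases hgood : pvGoodN matrix R C k = true
    · have hcellm : pvCell matrix ((k / C : Nat) : Int) ((k % C : Nat) : Int) = true := by
        rw [← pvGoodN_cell hkn]; exact hgood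
      have hgρ : pvGoodN matrix R C (pvRootF matrix R C k) = true := pvRootF_good hgood
      have hrρ : pvRootF matrix R C (pvRootF matrix R C k) = pvRootF matrix R C k :=
        pvRootF_idem hgood
      have hρk : pvRootF matrix R C k ≤ k := pvRootF_le hgood
      by_cases hρ : pvRootF matrix R C k = k
      · -- k is a fresh seed: allocate a new region array
        have hnotmem : k ∉ pvSeeds matrix R C k := by
          rw [pvSeeds_mem]
          omega
        have hcont : st.2.contains k = false := by
          rw [PySem.Dict.contains_eq_isSome_get?, hget k]
          cases hp : pvPos (pvSeeds matrix R C k) k with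
          | none => rfl
          | some j =>
            have := (pvPos_isSome (pvSeeds matrix R C k) k)
            rw [hp] at this
            exact absurd (this.mp rfl) hnotmem
        have hseed : (pvGoodN matrix R C k && (pvRootF matrix R C k == k)) = true := by
          rw [hgood, hρ]
          simp
        have hseeds' : pvSeeds matrix R C (k + 1) = pvSeeds matrix R C k ++ [k] := by
          rw [pvSeeds_succ, if_pos hseed]
        have hstep : pvStepB matrix R C (pvParentF matrix R C) st k
            = (st.1 ++ [pvMark (List.replicate R (List.replicate C false))
                  ((k / C : Nat) : Int) ((k % C : Nat) : Int)],
               st.2.insert k st.1.length) := by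
          unfold pvStepB
          rw [if_pos hcellm]
          simp only [hfind, hρ, hcont, Bool.false_eq_true, if_false]
          simp only [PySem.Dict.getD_insert_self]
          have hg1 : (st.1 ++ [List.replicate R (List.replicate C false)]).getD
              st.1.length [] = List.replicate R (List.replicate C false) := by
            rw [List.getD_eq_getElem?_getD, List.getElem?_append_right (le_refl _)]
            simp
          rw [hg1, pvSet_snoc]
        rw [hstep]
        refine ⟨?_, ?_, ?_⟩
        · intro x
          simp only []
          rw [PySem.Dict.get?_insert, hseeds', pvPos_snoc, hget x]
          by_cases hx : x = k
          · rw [if_pos hx]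
            have hnone : pvPos (pvSeeds matrix R C k) x = none := by
              cases hp : pvPos (pvSeeds matrix R C k) x with
              | none => rfl
              | some j =>
                have hiss := (pvPos_isSome (pvSeeds matrix R C k) x)
                rw [hp, hx] at hiss
                exact absurd (hiss.mp rfl) hnotmem
            simp only [hnone]
            rw [if_pos hx.symm, hlen]
          · rw [if_neg hx]
            cases hp : pvPos (pvSeeds matrix R C k) x with
            | some j => rfl
            | none => rw [if_neg (fun hc : k = x => hx hc.symm)]
        · simp only [List.length_append, List.length_singleton, hseeds',
            List.length_append, List.length_singleton, hlen]
        · intro j m hj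
          rw [hseeds'] at hj
          rcases Nat.lt_or_ge j (pvSeeds matrix R C k).length with hjl | hjl
          · -- old entries untouched
            have hj' : (pvSeeds matrix R C k)[j]? = some m := by
              rw [List.getElem?_append_left hjl] at hj
              exact hj
            have hmlt : m < k := by
              have hmem : m ∈ pvSeeds matrix R C k := by
                obtain ⟨hl1, hl2⟩ := List.getElem?_eq_some_iff.mp hj'
                exact hl2 ▸ List.getElem_mem hl1
              exact (pvSeeds_mem.mp hmem).1
            have hmρ : pvRootF matrix R C k ≠ m := by omega
            have hgd : (st.1 ++ [pvMark (List.replicate R (List.replicate C false))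
                ((k / C : Nat) : Int) ((k % C : Nat) : Int)]).getD j []
                = st.1.getD j [] := by
              rw [List.getD_eq_getElem?_getD, List.getElem?_append_left (hlen ▸ hjl),
                List.getD_eq_getElem?_getD]
            rw [hgd, pvSk_succ_other hmρ]
            exact hcoh j m hj'
          · -- the new entry
            have hj' : j = (pvSeeds matrix R C k).length := by
              rcases Nat.lt_or_ge j ((pvSeeds matrix R C k).length + 1) with h2 | h2
              · omega
              · have hlj : (pvSeeds matrix R C k ++ [k]).length ≤ j := by
                  simp only [List.length_append, List.length_singleton]
                  omega
                rw [List.getElem?_eq_none_iff.mpr hlj] at hj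
                simp at hj
            subst hj'
            have hm : m = k := by
              rw [List.getElem?_append_right (le_refl _)] at hj
              simp at hj
              omega
            rw [hm]
            have hgd : (st.1 ++ [pvMark (List.replicate R (List.replicate C false))
                ((k / C : Nat) : Int) ((k % C : Nat) : Int)]).getD
                  (pvSeeds matrix R C k).length []
                = pvMark (List.replicate R (List.replicate C false))
                  ((k / C : Nat) : Int) ((k % C : Nat) : Int) := by
              rw [List.getD_eq_getElem?_getD, List.getElem?_append_right (hlen ▸ le_refl _)]
              simp [hlen]
            rw [hgd]
            have hSk : pvSk matrix R C (k + 1) k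
                = insert (pvToP C k) (∅ : Finset (Int × Int)) := by
              have h0 := pvSk_succ_hit (matrix := matrix) (R := R) (C := C) (k := k) hgood
              rw [hρ] at h0
              rw [h0, pvSk_self_empty]
            rw [hSk]
            exact pvCoh_mark (pvCoh_empty matrix R C) (pvGood_inb hgood)
      · -- root seen before: mark the cell in the existing region array
        have hρlt : pvRootF matrix R C k < k := lt_of_le_of_ne hρk hρ
        have hmem : pvRootF matrix R C k ∈ pvSeeds matrix R C k :=
          pvSeeds_mem.mpr ⟨hρlt, hgρ, hrρ⟩
        obtain ⟨j0, hpos⟩ : ∃ j0, pvPos (pvSeeds matrix R C k) (pvRootF matrix R C k)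
            = some j0 :=
          Option.isSome_iff_exists.mp ((pvPos_isSome _ _).mpr hmem)
        obtain ⟨hj0get, hj0lt⟩ := pvPos_spec _ _ j0 hpos
        have hcont : st.2.contains (pvRootF matrix R C k) = true := by
          rw [PySem.Dict.contains_eq_isSome_get?, hget, hpos]
          rfl
        have hgetρ : st.2.getD (pvRootF matrix R C k) 0 = j0 := by
          rw [PySem.Dict.getD_eq_get?_getD, hget, hpos]
          rfl
        have hstep : pvStepB matrix R C (pvParentF matrix R C) st k
            = (st.1.set j0 (pvMark (st.1.getD j0 [])
                ((k / C : Nat) : Int) ((k % C : Nat) : Int)), st.2) := by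
          unfold pvStepB
          rw [if_pos hcellm]
          simp only [hfind, hcont, if_true]
          simp only [hgetρ]
        rw [hstep]
        have hseeds' : pvSeeds matrix R C (k + 1) = pvSeeds matrix R C k := by
          rw [pvSeeds_succ, if_neg (by simp [hρ]), List.append_nil]
        refine ⟨?_, ?_, ?_⟩
        · intro x
          rw [hseeds']
          exact hget x
        · simp only [List.length_set, hseeds']
          exact hlen
        · intro j m hj
          rw [hseeds'] at hj
          by_cases hjj : j = j0
          · rw [hjj] at hj ⊢
            have hm : m = pvRootF matrix R C k := by
              rw [hj0get] at hj
              exact (Option.some_inj.mp hj).symm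
            rw [hm]
            have hgd : (st.1.set j0 (pvMark (st.1.getD j0 [])
                ((k / C : Nat) : Int) ((k % C : Nat) : Int))).getD j0 []
                = pvMark (st.1.getD j0 []) ((k / C : Nat) : Int) ((k % C : Nat) : Int) := by
              rw [List.getD_eq_getElem?_getD, List.getElem?_set]
              simp [hlen ▸ hj0lt]
            rw [hgd, pvSk_succ_hit hgood]
            exact pvCoh_mark (hcoh j0 _ hj0get) (pvGood_inb hgood)
          · have hgd : (st.1.set j0 (pvMark (st.1.getD j0 [])
                ((k / C : Nat) : Int) ((k % C : Nat) : Int))).getD j []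
                = st.1.getD j [] := by
              rw [List.getD_eq_getElem?_getD, List.getElem?_set]
              simp only [hjj, if_neg (fun hc : j0 = j => hjj hc.symm)]
              rw [List.getD_eq_getElem?_getD]
            have hne' : pvRootF matrix R C k ≠ m := by
              intro hc
              obtain ⟨hjlt, hje⟩ := List.getElem?_eq_some_iff.mp hj
              obtain ⟨hj0lt2, hj0e⟩ := List.getElem?_eq_some_iff.mp hj0get
              have : (pvSeeds matrix R C k)[j] = (pvSeeds matrix R C k)[j0] := by
                rw [hje, hj0e, hc]
              exact hjj ((List.Nodup.getElem_inj_iff (pvSeeds_nodup matrix R C k)).mp this)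
            rw [hgd, pvSk_succ_other hne']
            exact hcoh j m hj
    · -- dead cell
      have hgf : pvGoodN matrix R C k = false := by
        cases hgb : pvGoodN matrix R C k
        · rfl
        · exact absurd hgb hgood
      have hcellm : pvCell matrix ((k / C : Nat) : Int) ((k % C : Nat) : Int) = false := by
        rw [← pvGoodN_cell hkn]; exact hgf
      have hstep : pvStepB matrix R C (pvParentF matrix R C) st k = st := by
        unfold pvStepB
        rw [if_neg (by rw [hcellm]; simp)]
      have hseeds' : pvSeeds matrix R C (k + 1) = pvSeeds matrix R C k := by
        rw [pvSeeds_succ, if_neg (by rw [hgf]; simp), List.append_nil]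
      rw [hstep, hseeds']
      refine ⟨hget, hlen, ?_⟩
      intro j m hj
      rw [pvSk_succ_skip hgf]
      exact hcoh j m hj

theorem pvB_char_gen (matrix : List (List Bool)) (R C : Nat) :
    ufCollect matrix R C (pvParentF matrix R C)
      = (pvSeeds matrix R C (R * C)).map (fun m => pvGridOf R C (pvCompP matrix R C m)) := by
  obtain ⟨hget, hlen, hcoh⟩ := pvB_fold matrix R C (R * C) (le_refl _)
  rw [pvCollect_eq]
  apply List.ext_getElem
  · simp only [List.length_map]
    exact hlen
  · intro j h1 h2
    have hjlen : j < (pvSeeds matrix R C (R * C)).length := by simpa using h2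
    have hm : (pvSeeds matrix R C (R * C))[j]?
        = some ((pvSeeds matrix R C (R * C))[j]'hjlen) := List.getElem?_eq_getElem hjlen
    have hc := hcoh j _ hm
    have hmm : (pvSeeds matrix R C (R * C))[j]'hjlen ∈ pvSeeds matrix R C (R * C) :=
      List.getElem_mem hjlen
    obtain ⟨_, hg, hr⟩ := pvSeeds_mem.mp hmm
    rw [List.getElem_map]
    rw [← List.getD_eq_getElem _ ([] : List (List Bool)) h1]
    rw [pvSk_eq_comp hg hr] at hc
    exact pvCoh_ext hc (pvGridOf_coh R C _ (pvCompP_inb hg))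

theorem pvB_char (matrix : List (List Bool)) :
    find_regions_as_arrays_alt matrix
      = (pvSeeds matrix matrix.length (matrix.headD []).length
          (matrix.length * (matrix.headD []).length)).map
        (fun m => pvGridOf matrix.length (matrix.headD []).length
          (pvCompP matrix matrix.length (matrix.headD []).length m)) := by
  show ufCollect matrix matrix.length (matrix.headD []).length
      (pvParentF matrix matrix.length (matrix.headD []).length) = _
  exact pvB_char_gen matrix matrix.length (matrix.headD []).length

theorem pvPorts_eq (matrix : List (List Bool)) :
    find_regions_as_arrays matrix = find_regions_as_arrays_alt matrix :=
  (pvA_char matrix).trans (pvB_char matrix).symm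

-- ===== VERDICT (by name: the statement is the Claim_ definition above) =====
theorem find_regions_as_arrays_spec : Claim_equal_find_regions_as_arrays := by
  intro matrix _ _
  unfold Spec_find_regions_as_arrays
  exact pvPorts_eq matrix
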